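-- pv_equiv track=rewrite | github.com/OTOYO1020/ChatDev_Intermediate | WareHouse/ED_126__20250518055945/logic.py | minimum_cost_to_determine_cards
-- ===== SOURCE A (Python) =====
-- from typing import List, Tuple
--
-- def minimum_cost_to_determine_cards(N: int, M: int, conditions: List[Tuple[int, int, int]]) -> int:
--     if N <= 0 or M < 0:
--         return -1  # Handle edge cases
--     if M == 0:
--         return 0  # No conditions means no magic uses required
--     if len(conditions) > M:
--         return -1  # More conditions than allowed
--     parent = list(range(N))
--     rank = [0] * N
--     parity = [0] * N  # To store parity information
--     def find(x):
--         if parent[x] != x: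
--             orig_parent = parent[x]
--             parent[x] = find(parent[x])
--             parity[x] ^= parity[orig_parent]  # Update parity based on path compression
--         return parent[x]
--     def union(x, y, p):
--         root_x = find(x)
--         root_y = find(y)
--         if root_x != root_y:
--             # Union logic
--             if rank[root_x] > rank[root_y]:
--                 parent[root_y] = root_x
--                 parity[root_y] = parity[x] ^ parity[y] ^ p  # Update parity for root_y
--             elif rank[root_x] < rank[root_y]:
--                 parent[root_x] = root_y
--                 parity[root_x] = parity[x] ^ parity[y] ^ p  # Update parity for root_x
--             else:
--                 parent[root_y] = root_x
--                 parity[root_y] = parity[x] ^ parity[y] ^ p  # Update parity for root_y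
--                 rank[root_x] += 1
--         else:
--             # Check if the current parity matches
--             if (parity[x] ^ parity[y]) != p:
--                 return False  # Conditions cannot be satisfied
--         return True
--     # Process each condition
--     for x, y, required_parity in conditions:
--         if not union(x, y, required_parity % 2):
--             return -1  # Return -1 if conditions cannot be satisfied
--     # Count distinct groups based on the union-find structure
--     distinct_groups = set()
--     for i in range(N):
--         root = find(i)
--         distinct_groups.add((root, parity[i]))  # Store the root and its parity
--     # The number of magic uses required is equal to the number of distinct groups
--     magic_uses = len(distinct_groups)
--     return magic_uses  # Return the total number of magic uses required
-- ===== SOURCE B (Python) =====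
-- from typing import List, Tuple
--
-- def minimum_cost_to_determine_cards(N: int, M: int, conditions: List[Tuple[int, int, int]]) -> int:
--     if N <= 0 or M < 0:
--         return -1
--     if M == 0:
--         return 0
--     if len(conditions) > M:
--         return -1
--     # Flat labelling: comp[i] = current group id of card i, par[i] = parity within its group.
--     comp = list(range(N))
--     par = [0] * N
--     for x, y, required_parity in conditions:
--         p = required_parity % 2
--         cx, cy = comp[x], comp[y]
--         if cx == cy:
--             if par[x] ^ par[y] != p:
--                 return -1
--         else:
--             d = par[x] ^ par[y] ^ p
--             for i in range(N):
--                 if comp[i] == cy: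
--                     comp[i] = cx
--                     par[i] ^= d
--     return len({(comp[i], par[i]) for i in range(N)})
-- ===== Notes on version B (the rewrite author's own statement) =====
-- stated objective: simpler
-- what changed: Replaces the recursive rank/path-compression union-find (parent/rank/parity arrays and a mutating find) by a flat labelling: each card directly carries its group id and parity, a merge relabels the absorbed group in one linear scan, and the answer is the number of distinct (group, parity) labels; B trades A's near-linear merges for an O(N) scan per merge.
-- outside the precondition, e.g. on minimum_cost_to_determine_cards(2, 3, [(0, 0, 1), (5, 0, 0)]): A returns -1, B returns -1
import Mathlib
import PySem

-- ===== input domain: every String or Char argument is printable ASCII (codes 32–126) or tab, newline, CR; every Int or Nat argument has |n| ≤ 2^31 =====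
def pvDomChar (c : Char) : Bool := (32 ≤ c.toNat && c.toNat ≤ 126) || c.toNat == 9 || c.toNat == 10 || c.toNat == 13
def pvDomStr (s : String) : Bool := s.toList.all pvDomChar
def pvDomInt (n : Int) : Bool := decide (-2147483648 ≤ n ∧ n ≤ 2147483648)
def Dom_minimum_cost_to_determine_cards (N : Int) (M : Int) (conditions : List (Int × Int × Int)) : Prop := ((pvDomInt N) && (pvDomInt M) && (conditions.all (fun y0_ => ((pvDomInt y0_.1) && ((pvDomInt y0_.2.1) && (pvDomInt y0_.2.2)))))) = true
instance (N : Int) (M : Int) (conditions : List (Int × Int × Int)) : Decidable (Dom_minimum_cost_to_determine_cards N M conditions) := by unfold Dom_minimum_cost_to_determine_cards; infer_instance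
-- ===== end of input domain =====

-- B replaces A's rank/path-compression union-find by a flat group/parity labelling whose
-- merge relabels the absorbed group in one linear scan — simpler, not faster.

-- ===== PORT A =====
-- recursive find with path compression (fuel = a totality guard only; Python recursion is
-- bounded by the parent-forest depth, and `none` is exactly where Python raises IndexError)
def pvFind (fuel : Nat) (parent parity : List Int) (x : Int) :
    Option (Int × List Int × List Int) :=
  match fuel with
  | 0 => none
  | Nat.succ f =>
    match PySem.List.pyGet? parent x with
    | none => none
    | some px =>
      if px = x then some (px, parent, parity)
      else
        match pvFind f parent parity px with
        | none => none
        | some (r, parent1, parity1) =>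
          match PySem.List.pySet? parent1 x r with
          | none => none
          | some parent2 =>
            match PySem.List.pyGet? parity1 x, PySem.List.pyGet? parity1 px with
            | some qx, some qp =>
              match PySem.List.pySet? parity1 x (PySem.Int.bxor qx qp) with
              | none => none
              | some parity2 =>
                match PySem.List.pyGet? parent2 x with
                | none => none
                | some r2 => some (r2, parent2, parity2)
            | _, _ => none

def pvUnion (parent rank parity : List Int) (x y p : Int) :
    Option (Bool × List Int × List Int × List Int) :=
  match pvFind (parent.length + 1) parent parity x with
  | none => none
  | some (rx, parent1, parity1) =>
    match pvFind (parent1.length + 1) parent1 parity1 y with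
    | none => none
    | some (ry, parent2, parity2) =>
      if rx ≠ ry then
        match PySem.List.pyGet? rank rx, PySem.List.pyGet? rank ry with
        | some kx, some ky =>
          match PySem.List.pyGet? parity2 x, PySem.List.pyGet? parity2 y with
          | some ax, some ay =>
            let d := PySem.Int.bxor (PySem.Int.bxor ax ay) p
            if kx > ky then
              match PySem.List.pySet? parent2 ry rx, PySem.List.pySet? parity2 ry d with
              | some parent3, some parity3 => some (true, parent3, rank, parity3)
              | _, _ => none
            else if kx < ky then
              match PySem.List.pySet? parent2 rx ry, PySem.List.pySet? parity2 rx d with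
              | some parent3, some parity3 => some (true, parent3, rank, parity3)
              | _, _ => none
            else
              match PySem.List.pySet? parent2 ry rx, PySem.List.pySet? parity2 ry d with
              | some parent3, some parity3 =>
                match PySem.List.pyGet? rank rx with
                | some k =>
                  match PySem.List.pySet? rank rx (k + 1) with
                  | some rank3 => some (true, parent3, rank3, parity3)
                  | none => none
                | none => none
              | _, _ => none
          | _, _ => none
        | _, _ => none
      else
        match PySem.List.pyGet? parity2 x, PySem.List.pyGet? parity2 y with
        | some ax, some ay =>
          if PySem.Int.bxor ax ay ≠ p then some (false, parent2, rank, parity2)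
          else some (true, parent2, rank, parity2)
        | _, _ => none

def pvLoopA (cs : List (Int × Int × Int)) (parent rank parity : List Int) :
    Option (Bool × List Int × List Int × List Int) :=
  match cs with
  | [] => some (true, parent, rank, parity)
  | (x, y, rp) :: rest =>
    match pvUnion parent rank parity x y (PySem.Int.mod rp 2) with
    | none => none
    | some (false, parent1, rank1, parity1) => some (false, parent1, rank1, parity1)
    | some (true, parent1, rank1, parity1) => pvLoopA rest parent1 rank1 parity1

def pvCountA (is : List Int) (parent parity : List Int) (s : PySem.Set (Int × Int)) :
    Option (PySem.Set (Int × Int)) :=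
  match is with
  | [] => some s
  | i :: rest =>
    match pvFind (parent.length + 1) parent parity i with
    | none => none
    | some (r, parent1, parity1) =>
      match PySem.List.pyGet? parity1 i with
      | none => none
      | some q => pvCountA rest parent1 parity1 (PySem.Set.add s (r, q))

def minimum_cost_to_determine_cards (N : Int) (M : Int) (conditions : List (Int × Int × Int)) : Int :=
  if N ≤ 0 ∨ M < 0 then -1
  else if M = 0 then 0
  else if (PySem.List.len conditions) > M then -1
  else
    let parent := PySem.List.pyRange 0 N 1
    let rank := List.replicate N.toNat (0 : Int)
    let parity := List.replicate N.toNat (0 : Int)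
    match pvLoopA conditions parent rank parity with
    | none => 0  -- unreachable under Pre_: Python raises IndexError here
    | some (false, _, _, _) => -1
    | some (true, parent1, _, parity1) =>
      match pvCountA (PySem.List.pyRange 0 N 1) parent1 parity1 PySem.Set.empty with
      | none => 0  -- unreachable under Pre_
      | some s => PySem.Set.len s

-- ===== PORT B =====
-- flat labelling: comp[i] = group id, par[i] = parity inside the group; a merge relabels
-- the whole absorbed group in one linear scan (Source B's inner `for i in range(N)` loop)
def pvRelabel (n : Int) (comp par : List Int) (cy cx d : Int) : List Int × List Int :=
  (PySem.List.pyRange 0 n 1).foldl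
    (fun (st : List Int × List Int) i =>
      if PySem.List.pyGetD st.1 i 0 = cy then
        (PySem.List.pySetD st.1 i cx,
         PySem.List.pySetD st.2 i (PySem.Int.bxor (PySem.List.pyGetD st.2 i 0) d))
      else st)
    (comp, par)

def pvLoopB (cs : List (Int × Int × Int)) (n : Int) (comp par : List Int) :
    Option (Bool × List Int × List Int) :=
  match cs with
  | [] => some (true, comp, par)
  | (x, y, rp) :: rest =>
    let p := PySem.Int.mod rp 2
    match PySem.List.pyGet? comp x, PySem.List.pyGet? comp y with
    | some cx, some cy =>
      match PySem.List.pyGet? par x, PySem.List.pyGet? par y with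
      | some ax, some ay =>
        if cx = cy then
          if PySem.Int.bxor ax ay ≠ p then some (false, comp, par)
          else pvLoopB rest n comp par
        else
          let st := pvRelabel n comp par cy cx (PySem.Int.bxor (PySem.Int.bxor ax ay) p)
          pvLoopB rest n st.1 st.2
      | _, _ => none
    | _, _ => none

def minimum_cost_to_determine_cards_alt (N : Int) (M : Int) (conditions : List (Int × Int × Int)) : Int :=
  if N ≤ 0 ∨ M < 0 then -1
  else if M = 0 then 0
  else if (PySem.List.len conditions) > M then -1
  else
    match pvLoopB conditions N (PySem.List.pyRange 0 N 1) (List.replicate N.toNat (0 : Int)) with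
    | none => 0  -- unreachable under Pre_: Python raises IndexError here
    | some (false, _, _) => -1
    | some (true, comp, par) =>
      PySem.Set.len (PySem.Set.ofList ((PySem.List.pyRange 0 N 1).map
        (fun i => (PySem.List.pyGetD comp i 0, PySem.List.pyGetD par i 0))))

-- ===== PRECONDITION & SPEC =====
-- Pre_ excludes inputs that reach the main scan while containing an out-of-range card index:
-- on those A raises IndexError when the scan reaches the bad index, except when an earlier
-- condition already conflicts, where A (and B) return -1 before reaching it.
def Pre_minimum_cost_to_determine_cards (N : Int) (M : Int) (conditions : List (Int × Int × Int)) : Prop :=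
  (N ≤ 0 ∨ M < 0) ∨ M = 0 ∨ (conditions.length : Int) > M ∨
    ∀ c ∈ conditions, (-N ≤ c.1 ∧ c.1 < N) ∧ (-N ≤ c.2.1 ∧ c.2.1 < N)
instance (N : Int) (M : Int) (conditions : List (Int × Int × Int)) : Decidable (Pre_minimum_cost_to_determine_cards N M conditions) := by unfold Pre_minimum_cost_to_determine_cards; infer_instance
def pvWitness_minimum_cost_to_determine_cards : Int × Int × (List (Int × Int × Int)) := (3, 2, [(0, 1, 1), (1, 2, 1)])
def Spec_minimum_cost_to_determine_cards (N : Int) (M : Int) (conditions : List (Int × Int × Int)) (out : Int) : Prop := out = minimum_cost_to_determine_cards_alt N M conditions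
instance (N : Int) (M : Int) (conditions : List (Int × Int × Int)) (out : Int) : Decidable (Spec_minimum_cost_to_determine_cards N M conditions out) := by unfold Spec_minimum_cost_to_determine_cards; infer_instance

-- ===== CLAIM (what is proved, stated in full; the proofs are below) =====
def Claim_equal_minimum_cost_to_determine_cards : Prop := ∀ (N : Int) (M : Int) (conditions : List (Int × Int × Int)), Dom_minimum_cost_to_determine_cards N M conditions → Pre_minimum_cost_to_determine_cards N M conditions → Spec_minimum_cost_to_determine_cards N M conditions (minimum_cost_to_determine_cards N M conditions)

-- ===== LEMMAS AND PROOFS =====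

-- ---- bit/index helpers ----
def pvB2I (b : Bool) : Int := if b then 1 else 0

def pvBit (q : Int) : Bool := decide (q ≠ 0)

def pvIx (n : Nat) (x : Int) : Nat := if 0 ≤ x then x.toNat else n - (-x).toNat

theorem pvB2I_bxor (a b : Bool) : PySem.Int.bxor (pvB2I a) (pvB2I b) = pvB2I (xor a b) := by
  cases a <;> cases b <;> decide

theorem pvB2I_inj {a b : Bool} (h : pvB2I a = pvB2I b) : a = b := by
  cases a <;> cases b <;> simp_all [pvB2I]

theorem pv01_b2i {q : Int} (h : q = 0 ∨ q = 1) : q = pvB2I (pvBit q) := by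
  rcases h with h | h <;> subst h <;> decide

theorem pvB2I_01 (b : Bool) : pvB2I b = 0 ∨ pvB2I b = 1 := by cases b <;> simp [pvB2I]

theorem pvModTwo (rp : Int) : PySem.Int.mod rp 2 = 0 ∨ PySem.Int.mod rp 2 = 1 := by
  have h1 := PySem.Int.mod_nonneg rp (b := 2) (by norm_num)
  have h2 := PySem.Int.mod_lt rp (b := 2) (by norm_num)
  omega

theorem pvIdx_eq {n : Nat} {x : Int} (h : PySem.Raise.InRange n x) :
    PySem.List.pyIdx? n x = some (pvIx n x) := by
  obtain ⟨h1, h2⟩ := h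
  simp only [PySem.List.pyIdx?, pvIx]
  by_cases hx : 0 ≤ x
  · simp [hx, h2]
  · simp [hx, h1]

theorem pvIx_lt {n : Nat} {x : Int} (h : PySem.Raise.InRange n x) : pvIx n x < n := by
  obtain ⟨h1, h2⟩ := h
  simp only [pvIx]
  split <;> omega

theorem pvGet_eq {α : Type} (d : α) {xs : List α} {x : Int}
    (h : PySem.Raise.InRange xs.length x) :
    PySem.List.pyGet? xs x = some (xs.getD (pvIx xs.length x) d) := by
  simp only [PySem.List.pyGet?, pvIdx_eq h, Option.bind_some]
  have := pvIx_lt h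
  simp [List.getD, List.getElem?_eq_getElem this]

theorem pvGet_eq' {α : Type} (d : α) {xs : List α} {x : Int} {n : Nat}
    (hn : xs.length = n) (h : PySem.Raise.InRange n x) :
    PySem.List.pyGet? xs x = some (xs.getD (pvIx n x) d) := by
  subst hn; exact pvGet_eq d h

theorem pvSet_eq {α : Type} {xs : List α} {x : Int} {v : α} {n : Nat}
    (hn : xs.length = n) (h : PySem.Raise.InRange n x) :
    PySem.List.pySet? xs x v = some (xs.set (pvIx n x) v) := by
  subst hn
  simp [PySem.List.pySet?, pvIdx_eq h]

-- ---- the abstract view of A's union-find state ----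
def pvStep (parent : List Int) (j : Nat) : Nat := (parent.getD j 0).toNat

def pvChase (parent parity : List Int) : Nat → Nat → Option (Nat × Bool × Nat)
  | 0, _ => none
  | f + 1, j =>
    if parent.getD j 0 = (j : Int) then some (j, false, 0)
    else (pvChase parent parity f (pvStep parent j)).map
      (fun v => (v.1, xor (pvBit (parity.getD j 0)) v.2.1, v.2.2 + 1))

def pvRoot (parent parity : List Int) (j : Nat) : Nat :=
  ((pvChase parent parity parent.length j).map (·.1)).getD j

def pvPar (parent parity : List Int) (j : Nat) : Bool :=
  ((pvChase parent parity parent.length j).map (·.2.1)).getD false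

def pvDist (parent parity : List Int) (j : Nat) : Nat :=
  ((pvChase parent parity parent.length j).map (·.2.2)).getD 0

structure pvUF (parent parity : List Int) : Prop where
  hlen : parity.length = parent.length
  hrange : ∀ j : Nat, j < parent.length →
    0 ≤ parent.getD j 0 ∧ parent.getD j 0 < (parent.length : Int)
  hsome : ∀ j : Nat, j < parent.length → (pvChase parent parity parent.length j).isSome
  hroot0 : ∀ j : Nat, j < parent.length → parent.getD j 0 = (j : Int) → parity.getD j 0 = 0
  hbit : ∀ j : Nat, j < parent.length → parity.getD j 0 = 0 ∨ parity.getD j 0 = 1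

theorem pvChase_mono {P Q : List Int} :
    ∀ {f f' : Nat} {j : Nat} {v}, pvChase P Q f j = some v → f ≤ f' → pvChase P Q f' j = some v := by
  intro f
  induction f with
  | zero => intro f' j v h; simp [pvChase] at h
  | succ f ih =>
    intro f' j v h hle
    obtain ⟨f'', rfl⟩ : ∃ f'', f' = f'' + 1 := ⟨f' - 1, by omega⟩
    simp only [pvChase] at h ⊢
    by_cases hr : P.getD j 0 = (j : Int)
    · rw [if_pos hr] at h ⊢; exact h
    · rw [if_neg hr] at h ⊢
      obtain ⟨w, hw, rfl⟩ := Option.map_eq_some_iff.mp h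
      rw [ih hw (by omega)]
      rfl

theorem pvChase_eq {P Q : List Int} {j : Nat}
    (h : (pvChase P Q P.length j).isSome) :
    pvChase P Q P.length j = some (pvRoot P Q j, pvPar P Q j, pvDist P Q j) := by
  obtain ⟨v, hv⟩ := Option.isSome_iff_exists.mp h
  simp [pvRoot, pvPar, pvDist, hv]

-- ---- recurrences for the abstract view ----
theorem pvChase_root {P Q : List Int} {f : Nat} {j : Nat} (hr : P.getD j 0 = (j : Int)) :
    pvChase P Q (f + 1) j = some (j, false, 0) := by
  simp only [pvChase]
  rw [if_pos hr]

theorem pvRoot_of_root {P Q : List Int} {j : Nat} (hn : 0 < P.length)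
    (hr : P.getD j 0 = (j : Int)) :
    pvRoot P Q j = j ∧ pvPar P Q j = false ∧ pvDist P Q j = 0 := by
  obtain ⟨f, hf⟩ : ∃ f, P.length = f + 1 := ⟨P.length - 1, by omega⟩
  have h := pvChase_root (Q := Q) (f := f) hr
  rw [← hf] at h
  simp [pvRoot, pvPar, pvDist, h]

theorem pvChase_nonroot (uf : pvUF P Q) {j : Nat} (hj : j < P.length)
    (hr : P.getD j 0 ≠ (j : Int)) :
    pvStep P j < P.length ∧
    (pvChase P Q P.length (pvStep P j)).isSome ∧
    pvRoot P Q j = pvRoot P Q (pvStep P j) ∧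
    pvPar P Q j = xor (pvBit (Q.getD j 0)) (pvPar P Q (pvStep P j)) ∧
    pvDist P Q j = pvDist P Q (pvStep P j) + 1 := by
  have hs := uf.hsome j hj
  have hstep : pvStep P j < P.length := by
    have := uf.hrange j hj
    simp only [pvStep]; omega
  obtain ⟨f, hf⟩ : ∃ f, P.length = f + 1 := ⟨P.length - 1, by omega⟩
  have h := pvChase_eq hs
  rw [hf] at h
  simp only [pvChase, if_neg hr] at h
  obtain ⟨w, hw, he⟩ := Option.map_eq_some_iff.mp h
  have hw' : pvChase P Q P.length (pvStep P j) = some w := pvChase_mono hw (by omega)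
  have hweq : w = (pvRoot P Q (pvStep P j), pvPar P Q (pvStep P j), pvDist P Q (pvStep P j)) := by
    have h2 := pvChase_eq (P := P) (Q := Q) (j := pvStep P j) (by simp [hw'])
    rw [hw'] at h2
    exact (Option.some_inj.mp h2)
  subst hweq
  have h1 := congrArg (fun p : Nat × Bool × Nat => p.1) he
  have h2 := congrArg (fun p : Nat × Bool × Nat => p.2.1) he
  have h3 := congrArg (fun p : Nat × Bool × Nat => p.2.2) he
  simp only at h1 h2 h3
  exact ⟨hstep, by simp [hw'], h1.symm, h2.symm, h3.symm⟩

theorem pvRoot_lt (uf : pvUF P Q) {j : Nat} (hj : j < P.length) :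
    pvRoot P Q j < P.length ∧ P.getD (pvRoot P Q j) 0 = (pvRoot P Q j : Int) := by
  generalize hd : pvDist P Q j = d
  induction d using Nat.strong_induction_on generalizing j with
  | _ d ih =>
    by_cases hr : P.getD j 0 = (j : Int)
    · obtain ⟨h1, _, _⟩ := pvRoot_of_root (Q := Q) (by omega) hr
      rw [h1]; exact ⟨hj, hr⟩
    · obtain ⟨hstep, _, hroot, _, hdist⟩ := pvChase_nonroot uf hj hr
      rw [hroot]
      exact ih (pvDist P Q (pvStep P j)) (by omega) hstep rfl

-- ---- iteration of the parent pointer; the distance bound ----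
def pvIter (P : List Int) : Nat → Nat → Nat
  | 0, j => j
  | k + 1, j => pvIter P k (pvStep P j)

theorem pvIter_add (P : List Int) (a b j : Nat) :
    pvIter P (a + b) j = pvIter P b (pvIter P a j) := by
  induction a generalizing j with
  | zero => simp [pvIter]
  | succ a ih =>
    have : a + 1 + b = (a + b) + 1 := by omega
    rw [this]
    simp only [pvIter]
    exact ih (pvStep P j)

theorem pvIter_lt {P : List Int} (hrange : ∀ j : Nat, j < P.length →
      0 ≤ P.getD j 0 ∧ P.getD j 0 < (P.length : Int)) {j : Nat} (hj : j < P.length) :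
    ∀ a, pvIter P a j < P.length := by
  intro a
  induction a generalizing j with
  | zero => simpa [pvIter]
  | succ a ih =>
    simp only [pvIter]
    refine ih ?_
    have := hrange j hj
    simp only [pvStep]; omega

theorem pvChase_iter {P Q : List Int} {f : Nat} {j r : Nat} {b : Bool} {d : Nat}
    (hc : pvChase P Q f j = some (r, b, d)) :
    ∀ a, a ≤ d → ∃ b', pvChase P Q f (pvIter P a j) = some (r, b', d - a) := by
  intro a
  induction a generalizing j b d with
  | zero => intro _; exact ⟨b, by simpa [pvIter] using hc⟩
  | succ a ih =>
    intro ha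
    obtain ⟨f', rfl⟩ : ∃ f', f = f' + 1 := by
      cases f with
      | zero => simp [pvChase] at hc
      | succ f' => exact ⟨f', rfl⟩
    simp only [pvChase] at hc
    by_cases hr : P.getD j 0 = (j : Int)
    · rw [if_pos hr] at hc
      obtain he := Option.some_inj.mp hc
      have hd0 : d = 0 := by
        have := congrArg (fun p => p.2.2) he; simpa using this.symm
      exact absurd ha (by omega)
    · rw [if_neg hr] at hc
      obtain ⟨w, hw, he⟩ := Option.map_eq_some_iff.mp hc
      obtain ⟨r1, b1, d1⟩ := w
      have hr1 : r1 = r := by have := congrArg (fun p => p.1) he; simpa using this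
      have hd1 : d1 + 1 = d := by have := congrArg (fun p => p.2.2) he; simpa using this
      rw [hr1] at hw
      have hw' : pvChase P Q (f' + 1) (pvStep P j) = some (r, b1, d1) := pvChase_mono hw (by omega)
      obtain ⟨b', hb'⟩ := ih hw' (by omega)
      refine ⟨b', ?_⟩
      have hiter : pvIter P (a + 1) j = pvIter P a (pvStep P j) := by
        have : a + 1 = 1 + a := by omega
        rw [this, pvIter_add]; rfl
      rw [hiter]
      have : d1 - a = d - (a + 1) := by omega
      rw [← this]
      exact hb'

theorem pvDist_bound {P Q : List Int} {f : Nat} {j r : Nat} {b : Bool} {d : Nat}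
    (hrange : ∀ j : Nat, j < P.length →
      0 ≤ P.getD j 0 ∧ P.getD j 0 < (P.length : Int))
    (hj : j < P.length) (hc : pvChase P Q f j = some (r, b, d)) :
    d < P.length := by
  classical
  set L : List Nat := (List.range (d + 1)).map (fun a => pvIter P a j) with hL
  have hinj : ∀ a ∈ List.range (d + 1), ∀ a' ∈ List.range (d + 1),
      pvIter P a j = pvIter P a' j → a = a' := by
    intro a ha a' ha' heq
    simp only [List.mem_range] at ha ha'
    obtain ⟨b1, hb1⟩ := pvChase_iter hc a (by omega)
    obtain ⟨b2, hb2⟩ := pvChase_iter hc a' (by omega)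
    rw [heq] at hb1
    rw [hb1] at hb2
    have := congrArg (fun o => o.map (fun p => p.2.2)) hb2
    simp at this
    omega
  have hnodup : L.Nodup := (List.nodup_range).map_on hinj
  have hsub : L.toFinset ⊆ Finset.range P.length := by
    intro x hx
    simp only [hL, List.mem_toFinset, List.mem_map, List.mem_range] at hx
    obtain ⟨a, _, rfl⟩ := hx
    simpa [Finset.mem_range] using pvIter_lt hrange hj a
  have hcard : L.toFinset.card = d + 1 := by
    rw [List.toFinset_card_of_nodup hnodup]
    simp [hL]
  have := Finset.card_le_card hsub
  rw [hcard, Finset.card_range] at this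
  omega

-- ---- updating one cell ----
theorem pvGetD_set {xs : List Int} {t : Nat} (v : Int) (j : Nat) :
    (xs.set t v).getD j 0 = if j = t ∧ t < xs.length then v else xs.getD j 0 := by
  simp only [List.getD, List.getElem?_set]
  split_ifs <;> simp_all

theorem pvBit_b2i (b : Bool) : pvBit (pvB2I b) = b := by cases b <;> decide

theorem pvChase_succ (P Q : List Int) (f : Nat) (j : Nat) :
    pvChase P Q (f + 1) j =
      if P.getD j 0 = (j : Int) then some (j, false, 0)
      else (pvChase P Q f (pvStep P j)).map
        (fun v => (v.1, xor (pvBit (Q.getD j 0)) v.2.1, v.2.2 + 1)) := rfl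

theorem pvChase_min {P Q : List Int} :
    ∀ {f j r : Nat} {b : Bool} {d : Nat}, pvChase P Q f j = some (r, b, d) →
      pvChase P Q (d + 1) j = some (r, b, d) := by
  intro f
  induction f with
  | zero => intro j r b d h; simp [pvChase] at h
  | succ f ih =>
    intro j r b d h
    simp only [pvChase] at h
    by_cases hr : P.getD j 0 = (j : Int)
    · rw [if_pos hr] at h
      have hd : d = 0 := by
        have := congrArg (fun p : Nat × Bool × Nat => p.2.2) (Option.some_inj.mp h)
        simpa using this.symm
      subst hd
      rw [pvChase_root hr]
      exact h
    · rw [if_neg hr] at h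
      obtain ⟨⟨r1, b1, d1⟩, hw, he⟩ := Option.map_eq_some_iff.mp h
      have h1 := congrArg (fun p : Nat × Bool × Nat => p.1) he
      have h2 := congrArg (fun p : Nat × Bool × Nat => p.2.1) he
      have h3 := congrArg (fun p : Nat × Bool × Nat => p.2.2) he
      simp only at h1 h2 h3
      have hmin := ih hw
      subst h3
      rw [pvChase_succ, if_neg hr, hmin]
      simp only [Option.map_some]
      rw [h1, h2]

-- the two state updates A performs: path compression (set a node to point at its root,
-- with its path parity) and linking one root under another
theorem pvCompress {P Q : List Int} (uf : pvUF P Q) {t : Nat} (ht : t < P.length) :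
    pvUF (P.set t (pvRoot P Q t : Int)) (Q.set t (pvB2I (pvPar P Q t))) ∧
    (∀ j, j < P.length →
      pvRoot (P.set t (pvRoot P Q t : Int)) (Q.set t (pvB2I (pvPar P Q t))) j = pvRoot P Q j ∧
      pvPar (P.set t (pvRoot P Q t : Int)) (Q.set t (pvB2I (pvPar P Q t))) j = pvPar P Q j) := by
  set P' := P.set t (pvRoot P Q t : Int) with hP'
  set Q' := Q.set t (pvB2I (pvPar P Q t)) with hQ'
  have hlenP : P'.length = P.length := by simp [hP']
  have hlenQ : Q'.length = Q.length := by simp [hQ']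
  have hgetP : ∀ j, P'.getD j 0 = if j = t then (pvRoot P Q t : Int) else P.getD j 0 := by
    intro j
    rw [hP', pvGetD_set]
    by_cases hj : j = t <;> simp [hj, ht]
  have hgetQ : ∀ j, Q'.getD j 0 = if j = t then pvB2I (pvPar P Q t) else Q.getD j 0 := by
    intro j
    rw [hQ', pvGetD_set]
    by_cases hj : j = t <;> simp [hj, uf.hlen ▸ ht]
  have hrange' : ∀ j : Nat, j < P'.length → 0 ≤ P'.getD j 0 ∧ P'.getD j 0 < (P'.length : Int) := by
    intro j hj
    rw [hlenP] at hj ⊢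
    rw [hgetP]
    by_cases hjt : j = t
    · have := (pvRoot_lt uf ht).1
      simp [hjt]; omega
    · simpa [hjt] using uf.hrange j hj
  -- the rebuilt chase
  have key : ∀ j, j < P.length →
      ∃ d', pvChase P' Q' (pvDist P Q j + 2) j = some (pvRoot P Q j, pvPar P Q j, d') := by
    intro j hj
    generalize hd : pvDist P Q j = d
    induction d using Nat.strong_induction_on generalizing j with
    | _ d ih =>
      subst hd
      by_cases hjt : j = t
      · subst hjt
        by_cases hr : P.getD j 0 = (j : Int)
        · obtain ⟨h1, h2, _⟩ := pvRoot_of_root (Q := Q) (by omega) hr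
          have hc0 : P'.getD j 0 = (j : Int) := by rw [hgetP, if_pos rfl, h1]
          refine ⟨0, ?_⟩
          have hfe : pvDist P Q j + 2 = (pvDist P Q j + 1) + 1 := rfl
          rw [hfe, pvChase_root hc0, h1, h2]
        · -- t not a root: new entry points at the root
          have hroot := pvRoot_lt uf hj
          have hne : pvRoot P Q j ≠ j := by
            intro hc
            apply hr
            rw [← hc]
            exact hroot.2
          have hstep' : P'.getD j 0 = (pvRoot P Q j : Int) := by rw [hgetP, if_pos rfl]
          have hroot' : P'.getD (pvRoot P Q j) 0 = (pvRoot P Q j : Int) := by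
            rw [hgetP, if_neg hne]
            exact hroot.2
          refine ⟨1, ?_⟩
          have hcond : ¬ P'.getD j 0 = (j : Int) := by
            rw [hstep']
            intro hc
            exact hne (by exact_mod_cast hc)
          have hs2 : pvStep P' j = pvRoot P Q j := by
            unfold pvStep
            rw [hstep']
            exact Int.toNat_natCast _
          have hfe : pvDist P Q j + 2 = (pvDist P Q j + 1) + 1 := rfl
          rw [hfe, pvChase_succ, if_neg hcond, hs2]
          obtain ⟨d0, hfe2⟩ : ∃ d0, pvDist P Q j + 1 = d0 + 1 := ⟨pvDist P Q j, rfl⟩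
          rw [hfe2, pvChase_root hroot']
          simp only [Option.map_some]
          rw [hgetQ, if_pos rfl]
          simp [pvBit_b2i]
      · by_cases hr : P.getD j 0 = (j : Int)
        · obtain ⟨h1, h2, _⟩ := pvRoot_of_root (Q := Q) (by omega) hr
          have hc0 : P'.getD j 0 = (j : Int) := by rw [hgetP, if_neg hjt]; exact hr
          refine ⟨0, ?_⟩
          have hfe : pvDist P Q j + 2 = (pvDist P Q j + 1) + 1 := rfl
          rw [hfe, pvChase_root hc0, h1, h2]
        · obtain ⟨hsl, _, hR, hB, hD⟩ := pvChase_nonroot uf hj hr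
          obtain ⟨d', hd'⟩ := ih (pvDist P Q (pvStep P j)) (by omega) (pvStep P j) hsl rfl
          have hstep' : P'.getD j 0 = P.getD j 0 := by rw [hgetP, if_neg hjt]
          have hcond : ¬ P'.getD j 0 = (j : Int) := by rw [hstep']; exact hr
          have hs2 : pvStep P' j = pvStep P j := by
            unfold pvStep
            rw [hstep']
          refine ⟨d' + 1, ?_⟩
          have hfe : pvDist P Q j + 2 = (pvDist P Q j + 1) + 1 := rfl
          have hd'' : pvChase P' Q' (pvDist P Q j + 1) (pvStep P j) =
              some (pvRoot P Q (pvStep P j), pvPar P Q (pvStep P j), d') :=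
            pvChase_mono hd' (by omega)
          rw [hfe, pvChase_succ, if_neg hcond, hs2, hd'']
          simp only [Option.map_some]
          rw [hgetQ, if_neg hjt, hR, hB]
  -- package: from `key` get hsome and preservation
  have key' : ∀ j, j < P.length →
      pvChase P' Q' P'.length j = some (pvRoot P Q j, pvPar P Q j, pvDist P' Q' j) := by
    intro j hj
    obtain ⟨d', hd'⟩ := key j hj
    have hmin := pvChase_min hd'
    have hb := pvDist_bound (Q := Q') hrange' (show j < P'.length by omega) hmin
    have h : pvChase P' Q' P'.length j = some (pvRoot P Q j, pvPar P Q j, d') :=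
      pvChase_mono hmin (by omega)
    have : pvDist P' Q' j = d' := by simp [pvDist, h]
    rw [this]
    exact h
  have hpres : ∀ j, j < P.length → pvRoot P' Q' j = pvRoot P Q j ∧ pvPar P' Q' j = pvPar P Q j := by
    intro j hj
    have := key' j hj
    constructor
    · simp [pvRoot, this]
    · simp [pvPar, this]
  refine ⟨⟨?_, hrange', ?_, ?_, ?_⟩, hpres⟩
  · rw [hlenP, hlenQ, uf.hlen]
  · intro j hj
    rw [key' j (by rw [hlenP] at hj; exact hj)]
    rfl
  · intro j hj hr
    rw [hlenP] at hj
    rw [hgetP] at hr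
    rw [hgetQ]
    by_cases hjt : j = t
    · subst hjt
      rw [if_pos rfl] at hr
      have hrt : pvRoot P Q j = j := by exact_mod_cast hr
      have hparf : pvPar P Q j = false := by
        by_cases hrr : P.getD j 0 = (j : Int)
        · exact (pvRoot_of_root (Q := Q) (by omega) hrr).2.1
        · exact absurd (hrt ▸ (pvRoot_lt uf hj).2) hrr
      rw [if_pos rfl, hparf]
      rfl
    · rw [if_neg hjt] at hr
      rw [if_neg hjt]
      exact uf.hroot0 j hj hr
  · intro j hj
    rw [hlenP] at hj
    rw [hgetQ]
    by_cases hjt : j = t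
    · rw [if_pos hjt]
      exact pvB2I_01 _
    · rw [if_neg hjt]
      exact uf.hbit j hj

theorem pvLink {P Q : List Int} (uf : pvUF P Q) {rx ry : Nat}
    (hrx : rx < P.length) (hry : ry < P.length)
    (hrxr : P.getD rx 0 = (rx : Int)) (hryr : P.getD ry 0 = (ry : Int))
    (hne : rx ≠ ry) (dd : Bool) :
    pvUF (P.set ry (rx : Int)) (Q.set ry (pvB2I dd)) ∧
    (∀ j, j < P.length →
      pvRoot (P.set ry (rx : Int)) (Q.set ry (pvB2I dd)) j =
        (if pvRoot P Q j = ry then rx else pvRoot P Q j) ∧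
      pvPar (P.set ry (rx : Int)) (Q.set ry (pvB2I dd)) j =
        (if pvRoot P Q j = ry then xor (pvPar P Q j) dd else pvPar P Q j)) := by
  set P' := P.set ry (rx : Int) with hP'
  set Q' := Q.set ry (pvB2I dd) with hQ'
  have hlenP : P'.length = P.length := by simp [hP']
  have hlenQ : Q'.length = Q.length := by simp [hQ']
  have hgetP : ∀ j, P'.getD j 0 = if j = ry then (rx : Int) else P.getD j 0 := by
    intro j
    rw [hP', pvGetD_set]
    by_cases hj : j = ry <;> simp [hj, hry]
  have hgetQ : ∀ j, Q'.getD j 0 = if j = ry then pvB2I dd else Q.getD j 0 := by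
    intro j
    rw [hQ', pvGetD_set]
    by_cases hj : j = ry <;> simp [hj, uf.hlen ▸ hry]
  have hrange' : ∀ j : Nat, j < P'.length → 0 ≤ P'.getD j 0 ∧ P'.getD j 0 < (P'.length : Int) := by
    intro j hj
    rw [hlenP] at hj ⊢
    rw [hgetP]
    by_cases hjt : j = ry
    · simp [hjt]; omega
    · simpa [hjt] using uf.hrange j hj
  obtain ⟨hRy, hPy, _⟩ := pvRoot_of_root (Q := Q) (by omega) hryr
  have key : ∀ j, j < P.length →
      ∃ d', pvChase P' Q' (pvDist P Q j + 3) j =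
        some ((if pvRoot P Q j = ry then rx else pvRoot P Q j),
              (if pvRoot P Q j = ry then xor (pvPar P Q j) dd else pvPar P Q j), d') := by
    intro j hj
    generalize hd : pvDist P Q j = d
    induction d using Nat.strong_induction_on generalizing j with
    | _ d ih =>
      subst hd
      by_cases hjt : j = ry
      · subst hjt
        have hcond : ¬ P'.getD j 0 = (j : Int) := by
          rw [hgetP, if_pos rfl]
          intro hc
          exact hne (by exact_mod_cast hc)
        have hs2 : pvStep P' j = rx := by
          unfold pvStep
          rw [hgetP, if_pos rfl]
          exact Int.toNat_natCast _
        have hrootx : P'.getD rx 0 = (rx : Int) := by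
          rw [hgetP, if_neg hne]
          exact hrxr
        refine ⟨1, ?_⟩
        have hfe : pvDist P Q j + 3 = (pvDist P Q j + 2) + 1 := rfl
        rw [hfe, pvChase_succ, if_neg hcond, hs2]
        obtain ⟨d0, hfe2⟩ : ∃ d0, pvDist P Q j + 2 = d0 + 1 := ⟨pvDist P Q j + 1, rfl⟩
        rw [hfe2, pvChase_root hrootx]
        simp only [Option.map_some]
        rw [hgetQ, if_pos rfl]
        simp [pvBit_b2i, hRy, hPy]
      · by_cases hr : P.getD j 0 = (j : Int)
        · obtain ⟨h1, h2, _⟩ := pvRoot_of_root (Q := Q) (by omega) hr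
          have hc0 : P'.getD j 0 = (j : Int) := by rw [hgetP, if_neg hjt]; exact hr
          refine ⟨0, ?_⟩
          have hfe : pvDist P Q j + 3 = (pvDist P Q j + 2) + 1 := rfl
          rw [hfe, pvChase_root hc0, h1, h2]
          simp [fun h => hjt (h1 ▸ h : j = ry), h1, hjt]
        · obtain ⟨hsl, _, hR, hB, hD⟩ := pvChase_nonroot uf hj hr
          obtain ⟨d', hd'⟩ := ih (pvDist P Q (pvStep P j)) (by omega) (pvStep P j) hsl rfl
          have hstep' : P'.getD j 0 = P.getD j 0 := by rw [hgetP, if_neg hjt]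
          have hcond : ¬ P'.getD j 0 = (j : Int) := by rw [hstep']; exact hr
          have hs2 : pvStep P' j = pvStep P j := by
            unfold pvStep
            rw [hstep']
          refine ⟨d' + 1, ?_⟩
          have hfe : pvDist P Q j + 3 = (pvDist P Q j + 2) + 1 := rfl
          have hd'' : pvChase P' Q' (pvDist P Q j + 2) (pvStep P j) =
              some ((if pvRoot P Q (pvStep P j) = ry then rx else pvRoot P Q (pvStep P j)),
                    (if pvRoot P Q (pvStep P j) = ry then xor (pvPar P Q (pvStep P j)) dd
                     else pvPar P Q (pvStep P j)), d') :=
            pvChase_mono hd' (by omega)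
          rw [hfe, pvChase_succ, if_neg hcond, hs2, hd'']
          simp only [Option.map_some]
          rw [hgetQ, if_neg hjt, hR, hB]
          by_cases hcase : pvRoot P Q (pvStep P j) = ry <;>
            simp [hcase, Bool.xor_assoc]
  have key' : ∀ j, j < P.length →
      pvChase P' Q' P'.length j =
        some ((if pvRoot P Q j = ry then rx else pvRoot P Q j),
              (if pvRoot P Q j = ry then xor (pvPar P Q j) dd else pvPar P Q j),
              pvDist P' Q' j) := by
    intro j hj
    obtain ⟨d', hd'⟩ := key j hj
    have hmin := pvChase_min hd'
    have hb := pvDist_bound (Q := Q') hrange' (show j < P'.length by omega) hmin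
    have h : pvChase P' Q' P'.length j = some (_, _, d') := pvChase_mono hmin (by omega)
    have hdd : pvDist P' Q' j = d' := by simp [pvDist, h]
    rw [hdd]
    exact h
  have hpres : ∀ j, j < P.length →
      pvRoot P' Q' j = (if pvRoot P Q j = ry then rx else pvRoot P Q j) ∧
      pvPar P' Q' j = (if pvRoot P Q j = ry then xor (pvPar P Q j) dd else pvPar P Q j) := by
    intro j hj
    have h := key' j hj
    constructor
    · simp [pvRoot, h]
    · simp [pvPar, h]
  refine ⟨⟨?_, hrange', ?_, ?_, ?_⟩, hpres⟩
  · rw [hlenP, hlenQ, uf.hlen]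
  · intro j hj
    rw [key' j (by rw [hlenP] at hj; exact hj)]
    rfl
  · intro j hj hr
    rw [hlenP] at hj
    rw [hgetP] at hr
    rw [hgetQ]
    by_cases hjt : j = ry
    · subst hjt
      rw [if_pos rfl] at hr
      exact absurd (by exact_mod_cast hr) hne
    · rw [if_neg hjt] at hr
      rw [if_neg hjt]
      exact uf.hroot0 j hj hr
  · intro j hj
    rw [hlenP] at hj
    rw [hgetQ]
    by_cases hjt : j = ry
    · rw [if_pos hjt]
      exact pvB2I_01 _
    · rw [if_neg hjt]
      exact uf.hbit j hj

-- ---- specification of A's recursive find ----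
theorem pvIx_nonneg {n : Nat} {v : Int} (hv : 0 ≤ v) : pvIx n v = v.toNat := by
  simp [pvIx, hv]

theorem pvIx_natCast (n k : Nat) : pvIx n (k : Int) = k := by
  rw [pvIx_nonneg (by omega)]
  exact Int.toNat_natCast k

theorem pvDist_lt_len {P Q : List Int} (uf : pvUF P Q) {j : Nat} (hj : j < P.length) :
    pvDist P Q j < P.length :=
  pvDist_bound uf.hrange hj (pvChase_eq (uf.hsome j hj))

theorem pvFind_succ (f : Nat) (P Q : List Int) (x : Int) :
    pvFind (f + 1) P Q x =
      match PySem.List.pyGet? P x with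
      | none => none
      | some px =>
        if px = x then some (px, P, Q)
        else
          match pvFind f P Q px with
          | none => none
          | some (r, parent1, parity1) =>
            match PySem.List.pySet? parent1 x r with
            | none => none
            | some parent2 =>
              match PySem.List.pyGet? parity1 x, PySem.List.pyGet? parity1 px with
              | some qx, some qp =>
                match PySem.List.pySet? parity1 x (PySem.Int.bxor qx qp) with
                | none => none
                | some parity2 =>
                  match PySem.List.pyGet? parent2 x with
                  | none => none
                  | some r2 => some (r2, parent2, parity2)
              | _, _ => none := rfl

theorem pvFind_spec {P Q : List Int} (uf : pvUF P Q) :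
    ∀ {x : Int}, PySem.Raise.InRange P.length x →
    ∀ fuel : Nat, pvDist P Q (pvIx P.length x) + 2 ≤ fuel →
    ∃ P' Q', pvFind fuel P Q x =
        some (((pvRoot P Q (pvIx P.length x) : Nat) : Int), P', Q') ∧
      pvUF P' Q' ∧ P'.length = P.length ∧
      (∀ j, j < P.length → pvRoot P' Q' j = pvRoot P Q j ∧ pvPar P' Q' j = pvPar P Q j) ∧
      (∀ j, j < P.length →
        (P'.getD j 0 = P.getD j 0 ∧ Q'.getD j 0 = Q.getD j 0) ∨
        (P'.getD j 0 = (pvRoot P Q j : Int) ∧ Q'.getD j 0 = pvB2I (pvPar P Q j) ∧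
          pvDist P Q j ≤ pvDist P Q (pvIx P.length x))) ∧
      P'.getD (pvIx P.length x) 0 = (pvRoot P Q (pvIx P.length x) : Int) ∧
      Q'.getD (pvIx P.length x) 0 = pvB2I (pvPar P Q (pvIx P.length x)) := by
  intro x hx
  generalize hd : pvDist P Q (pvIx P.length x) = d
  induction d using Nat.strong_induction_on generalizing x with
  | _ d ih =>
    subst hd
    intro fuel hfuel
    have hixlt : pvIx P.length x < P.length := pvIx_lt hx
    obtain ⟨f, rfl⟩ : ∃ f, fuel = f + 1 := ⟨fuel - 1, by omega⟩
    rw [pvFind_succ, pvGet_eq (0 : Int) hx]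
    by_cases hpx : P.getD (pvIx P.length x) 0 = x
    · -- parent[x] == x : x ≥ 0 and pvIx x is a root
      have hx0 : 0 ≤ x := (uf.hrange _ hixlt).1.trans (le_of_eq hpx)
      have hcast : ((pvIx P.length x : Nat) : Int) = x := by
        rw [pvIx_nonneg hx0]; omega
      have hroot : P.getD (pvIx P.length x) 0 = ((pvIx P.length x : Nat) : Int) := by
        rw [hpx, hcast]
      obtain ⟨hR, hPf, _⟩ := pvRoot_of_root (Q := Q) (by omega) hroot
      refine ⟨P, Q, ?_, uf, rfl, fun j _ => ⟨rfl, rfl⟩, fun j _ => Or.inl ⟨rfl, rfl⟩, ?_, ?_⟩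
      · simp only [if_pos hpx]
        rw [hpx, hR, hcast]
      · rw [hR, hcast]
        exact hpx
      · rw [hPf, uf.hroot0 _ hixlt hroot]
        rfl
    · simp only [if_neg hpx]
      by_cases hroot : P.getD (pvIx P.length x) 0 = ((pvIx P.length x : Nat) : Int)
      · -- pvIx x is a root but x < 0 (parent[x] = ix ≠ x)
        obtain ⟨hR, hPf, hD0⟩ := pvRoot_of_root (Q := Q) (by omega) hroot
        obtain ⟨f', rfl⟩ : ∃ f', f = f' + 1 := ⟨f - 1, by omega⟩
        have hxin : PySem.Raise.InRange P.length ((pvIx P.length x : Nat) : Int) := by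
          constructor <;> omega
        rw [hroot, pvFind_succ, pvGet_eq (0 : Int) hxin, pvIx_natCast, hroot]
        dsimp only
        rw [if_pos rfl]
        dsimp only
        rw [pvSet_eq rfl hx, pvGet_eq' (0 : Int) uf.hlen hx,
          pvGet_eq' (0 : Int) uf.hlen hxin, pvIx_natCast]
        dsimp only
        rw [PySem.Int.bxor_self, pvSet_eq uf.hlen hx]
        dsimp only
        have hrw : (P.set (pvIx P.length x) ((pvIx P.length x : Nat) : Int)).getD
            (pvIx P.length x) 0 = ((pvIx P.length x : Nat) : Int) := by
          rw [pvGetD_set]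
          simp [hixlt]
        rw [pvGet_eq' (0 : Int) (by simp) hx, hrw]
        dsimp only
        have hcomp := pvCompress uf hixlt
        rw [hR, hPf] at hcomp
        have hsets : Q.set (pvIx P.length x) (pvB2I false) = Q.set (pvIx P.length x) 0 := rfl
        rw [hsets] at hcomp
        rw [hR, hPf]
        refine ⟨_, _, rfl, hcomp.1, by simp, ?_, ?_, ?_, ?_⟩
        · intro j hj
          exact hcomp.2 j hj
        · intro j hj
          by_cases hji : j = pvIx P.length x
          · subst hji
            refine Or.inr ⟨?_, ?_, le_refl _⟩
            · rw [pvGetD_set, hR]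
              simp [hj]
            · rw [pvGetD_set, hPf]
              have hq : pvIx P.length x < Q.length := by rw [uf.hlen]; exact hj
              rw [if_pos (show pvIx P.length x = pvIx P.length x ∧ pvIx P.length x < Q.length
                from ⟨rfl, hq⟩)]
              rfl
          · exact Or.inl ⟨by rw [pvGetD_set, if_neg (fun hc => hji hc.1)],
              by rw [pvGetD_set, if_neg (fun hc => hji hc.1)]⟩
        · rw [pvGetD_set]
          simp [hixlt]
        · rw [pvGetD_set]
          have hq : pvIx P.length x < Q.length := by rw [uf.hlen]; exact hixlt
          rw [if_pos (show pvIx P.length x = pvIx P.length x ∧ pvIx P.length x < Q.length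
            from ⟨rfl, hq⟩)]
          rfl
      · -- genuine non-root: recurse
        obtain ⟨hsl, _, hR, hB, hD⟩ := pvChase_nonroot uf hixlt hroot
        have hpx0 : 0 ≤ P.getD (pvIx P.length x) 0 := (uf.hrange _ hixlt).1
        have hpxlt : P.getD (pvIx P.length x) 0 < (P.length : Int) := (uf.hrange _ hixlt).2
        have hpxin : PySem.Raise.InRange P.length (P.getD (pvIx P.length x) 0) := by
          constructor <;> omega
        have hipx : pvIx P.length (P.getD (pvIx P.length x) 0) = pvStep P (pvIx P.length x) := by
          rw [pvIx_nonneg hpx0]; rfl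
        obtain ⟨P1, Q1, hfind1, uf1, hlen1, hpres1, helem1, hPix1, hQix1⟩ :=
          ih (pvDist P Q (pvStep P (pvIx P.length x))) (by omega) hpxin (by rw [hipx]) f
            (by omega)
        rw [hipx] at hPix1 hQix1
        rw [hfind1]
        dsimp only
        rw [pvSet_eq hlen1 hx, pvGet_eq' (0 : Int) (uf1.hlen.trans hlen1) hx,
          pvGet_eq' (0 : Int) (uf1.hlen.trans hlen1) hpxin, hipx]
        dsimp only
        have hQ1ix : Q1.getD (pvIx P.length x) 0 = Q.getD (pvIx P.length x) 0 := by
          rcases helem1 (pvIx P.length x) hixlt with h | h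
          · exact h.2
          · exact absurd h.2.2 (by omega)
        have hQ1step : Q1.getD (pvStep P (pvIx P.length x)) 0 =
            pvB2I (pvPar P Q (pvStep P (pvIx P.length x))) := hQix1
        have hbxor : PySem.Int.bxor (Q1.getD (pvIx P.length x) 0)
            (Q1.getD (pvStep P (pvIx P.length x)) 0) = pvB2I (pvPar P Q (pvIx P.length x)) := by
          rw [hQ1ix, hQ1step, pv01_b2i (uf.hbit _ hixlt), pvB2I_bxor, ← hB]
        rw [hbxor, pvSet_eq (uf1.hlen.trans hlen1) hx]
        dsimp only
        have hixlt1 : pvIx P.length x < P1.length := by omega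
        have hget2 : (P1.set (pvIx P.length x)
            ((pvRoot P Q (pvStep P (pvIx P.length x)) : Nat) : Int)).getD (pvIx P.length x) 0 =
            ((pvRoot P Q (pvStep P (pvIx P.length x)) : Nat) : Int) := by
          rw [pvGetD_set]
          simp [hixlt1]
        rw [pvGet_eq' (0 : Int) (by simp; omega) hx, hget2]
        dsimp only
        have hcomp := pvCompress uf1 hixlt1
        have hrw1 : pvRoot P1 Q1 (pvIx P.length x) = pvRoot P Q (pvStep P (pvIx P.length x)) := by
          rw [(hpres1 _ hixlt).1, hR]
        have hrw2 : pvPar P1 Q1 (pvIx P.length x) = pvPar P Q (pvIx P.length x) :=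
          (hpres1 _ hixlt).2
        rw [hrw1, hrw2] at hcomp
        refine ⟨_, _, ?_, hcomp.1, by simp; omega, ?_, ?_, ?_, ?_⟩
        · rw [hR]
        · intro j hj
          have h1 := hcomp.2 j (by omega)
          have h2 := hpres1 j hj
          constructor
          · rw [h1.1]; exact h2.1
          · rw [h1.2]; exact h2.2
        · intro j hj
          by_cases hji : j = pvIx P.length x
          · subst hji
            refine Or.inr ⟨?_, ?_, le_refl _⟩
            · rw [pvGetD_set, hR]
              simp [hixlt1]
            · rw [pvGetD_set]
              simp [show pvIx P.length x < Q1.length by rw [uf1.hlen]; omega]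
          · rcases helem1 j hj with h | h
            · refine Or.inl ⟨?_, ?_⟩
              · rw [pvGetD_set, if_neg (fun hc => hji hc.1)]
                exact h.1
              · rw [pvGetD_set, if_neg (fun hc => hji hc.1)]
                exact h.2
            · refine Or.inr ⟨?_, ?_, ?_⟩
              · rw [pvGetD_set, if_neg (fun hc => hji hc.1)]
                exact h.1
              · rw [pvGetD_set, if_neg (fun hc => hji hc.1)]
                exact h.2.1
              · have := h.2.2
                omega
        · rw [pvGetD_set, hR]
          simp [hixlt1]
        · rw [pvGetD_set]
          simp [show pvIx P.length x < Q1.length by rw [uf1.hlen]; omega]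

-- ---- specification of A's union ----
theorem pvUnion_spec {P R Q : List Int} (uf : pvUF P Q) (hRlen : R.length = P.length)
    {x y p : Int} (hx : PySem.Raise.InRange P.length x) (hy : PySem.Raise.InRange P.length y)
    (hp : p = 0 ∨ p = 1) :
    ∃ ok P' R' Q', pvUnion P R Q x y p = some (ok, P', R', Q') ∧
      pvUF P' Q' ∧ P'.length = P.length ∧ R'.length = P.length ∧
      ((pvRoot P Q (pvIx P.length x) = pvRoot P Q (pvIx P.length y) →
        ok = (xor (pvPar P Q (pvIx P.length x)) (pvPar P Q (pvIx P.length y)) == pvBit p) ∧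
        (∀ j, j < P.length → pvRoot P' Q' j = pvRoot P Q j ∧ pvPar P' Q' j = pvPar P Q j)) ∧
      (pvRoot P Q (pvIx P.length x) ≠ pvRoot P Q (pvIx P.length y) →
        ok = true ∧
        ∃ u v : Nat,
          ((u = pvRoot P Q (pvIx P.length x) ∧ v = pvRoot P Q (pvIx P.length y)) ∨
           (u = pvRoot P Q (pvIx P.length y) ∧ v = pvRoot P Q (pvIx P.length x))) ∧
          ∀ j, j < P.length →
            pvRoot P' Q' j = (if pvRoot P Q j = v then u else pvRoot P Q j) ∧
            pvPar P' Q' j = (if pvRoot P Q j = v then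
                xor (pvPar P Q j)
                  (xor (xor (pvPar P Q (pvIx P.length x)) (pvPar P Q (pvIx P.length y))) (pvBit p))
              else pvPar P Q j))) := by
  have hixlt := pvIx_lt hx
  have hiylt := pvIx_lt hy
  obtain ⟨P1, Q1, hfind1, uf1, hlen1, hpres1, helem1, hPix1, hQix1⟩ :=
    pvFind_spec uf hx (P.length + 1) (by have := pvDist_lt_len uf hixlt; omega)
  have hy1 : PySem.Raise.InRange P1.length y := by rw [hlen1]; exact hy
  obtain ⟨P2, Q2, hfind2, uf2, hlen2, hpres2, helem2, hPiy2, hQiy2⟩ :=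
    pvFind_spec uf1 hy1 (P1.length + 1)
      (by have := pvDist_lt_len uf1 (pvIx_lt hy1); omega)
  have hipy : pvIx P1.length y = pvIx P.length y := by rw [hlen1]
  rw [hipy] at hfind2 helem2 hPiy2 hQiy2
  have hroty : pvRoot P1 Q1 (pvIx P.length y) = pvRoot P Q (pvIx P.length y) :=
    (hpres1 _ hiylt).1
  have hpary : pvPar P1 Q1 (pvIx P.length y) = pvPar P Q (pvIx P.length y) :=
    (hpres1 _ hiylt).2
  rw [hroty] at hfind2
  -- values of parity2 at ix and iy
  have hQ2ix : Q2.getD (pvIx P.length x) 0 = pvB2I (pvPar P Q (pvIx P.length x)) := by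
    rcases helem2 (pvIx P.length x) (by omega) with h | h
    · rw [h.2, hQix1]
    · rw [h.2.1, (hpres1 _ hixlt).2]
  have hQ2iy : Q2.getD (pvIx P.length y) 0 = pvB2I (pvPar P Q (pvIx P.length y)) := by
    rw [hQiy2, hpary]
  have hpres12 : ∀ j, j < P.length →
      pvRoot P2 Q2 j = pvRoot P Q j ∧ pvPar P2 Q2 j = pvPar P Q j := by
    intro j hj
    have h2 := hpres2 j (by omega)
    have h1 := hpres1 j hj
    exact ⟨h2.1.trans h1.1, h2.2.trans h1.2⟩
  have hrootx_lt := pvRoot_lt uf hixlt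
  have hrooty_lt := pvRoot_lt uf hiylt
  -- roots of P are roots of P2
  have hrootP2 : ∀ r : Nat, r < P.length → P.getD r 0 = (r : Int) →
      P2.getD r 0 = (r : Int) := by
    intro r hr hroot
    have hRr : pvRoot P Q r = r := (pvRoot_of_root (Q := Q) (by omega) hroot).1
    have hR2r : pvRoot P2 Q2 r = r := by rw [(hpres12 r hr).1, hRr]
    by_cases hc : P2.getD r 0 = (r : Int)
    · exact hc
    · exfalso
      obtain ⟨hsl2, _, hRs, _, hDs⟩ := pvChase_nonroot uf2 (by omega : r < P2.length) hc
      have hr2 := pvRoot_lt uf2 (by omega : r < P2.length)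
      rw [hR2r] at hr2
      exact hc hr2.2
  have hq := pv01_b2i hp
  unfold pvUnion
  rw [hfind1]
  dsimp only
  rw [hfind2]
  dsimp only
  by_cases hreq : pvRoot P Q (pvIx P.length x) = pvRoot P Q (pvIx P.length y)
  · rw [if_neg (by simp [hreq])]
    rw [pvGet_eq' (0 : Int) (uf2.hlen.trans (hlen2.trans hlen1)) hx,
      pvGet_eq' (0 : Int) (uf2.hlen.trans (hlen2.trans hlen1)) hy]
    dsimp only
    rw [hQ2ix, hQ2iy, hq, pvB2I_bxor]
    by_cases hab : xor (pvPar P Q (pvIx P.length x)) (pvPar P Q (pvIx P.length y)) = pvBit p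
    · rw [if_neg (by rw [hab]; simp)]
      refine ⟨true, P2, R, Q2, rfl, uf2, by omega, hRlen, ?_, ?_⟩
      · intro _
        refine ⟨?_, hpres12⟩
        simp [hab, pvBit_b2i]
      · intro hne
        exact absurd hreq hne
    · rw [if_pos (by intro hc; exact hab (pvB2I_inj hc))]
      refine ⟨false, P2, R, Q2, rfl, uf2, by omega, hRlen, ?_, ?_⟩
      · intro _
        refine ⟨?_, hpres12⟩
        simp [hab, pvBit_b2i]
      · intro hne
        exact absurd hreq hne
  · -- different roots: link
    rw [if_pos (by simpa using hreq)]
    have hrx_lt : pvRoot P Q (pvIx P.length x) < P.length := hrootx_lt.1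
    have hry_lt : pvRoot P Q (pvIx P.length y) < P.length := hrooty_lt.1
    have hinx : PySem.Raise.InRange P.length ((pvRoot P Q (pvIx P.length x) : Nat) : Int) := by
      constructor <;> omega
    have hiny : PySem.Raise.InRange P.length ((pvRoot P Q (pvIx P.length y) : Nat) : Int) := by
      constructor <;> omega
    have hlen2' : P2.length = P.length := hlen2.trans hlen1
    have hQlen2 : Q2.length = P.length := uf2.hlen.trans hlen2'
    rw [pvGet_eq' (0 : Int) hRlen hinx, pvGet_eq' (0 : Int) hRlen hiny]
    simp only [pvIx_natCast]
    try dsimp only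
    rw [pvGet_eq' (0 : Int) hQlen2 hx, pvGet_eq' (0 : Int) hQlen2 hy]
    dsimp only
    rw [hQ2ix, hQ2iy, hq, pvB2I_bxor, pvB2I_bxor]
    have hrootx2 : P2.getD (pvRoot P Q (pvIx P.length x)) 0 =
        ((pvRoot P Q (pvIx P.length x) : Nat) : Int) := hrootP2 _ hrx_lt hrootx_lt.2
    have hrooty2 : P2.getD (pvRoot P Q (pvIx P.length y)) 0 =
        ((pvRoot P Q (pvIx P.length y) : Nat) : Int) := hrootP2 _ hry_lt hrooty_lt.2
    by_cases hk1 : R.getD (pvRoot P Q (pvIx P.length x)) 0 > R.getD (pvRoot P Q (pvIx P.length y)) 0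
    · rw [if_pos hk1]
      rw [pvSet_eq hlen2' hiny, pvSet_eq hQlen2 hiny]
      simp only [pvIx_natCast]
      try dsimp only
      have hlink := pvLink uf2 (rx := pvRoot P Q (pvIx P.length x))
        (ry := pvRoot P Q (pvIx P.length y)) (by omega) (by omega) hrootx2 hrooty2 hreq
        (xor (xor (pvPar P Q (pvIx P.length x)) (pvPar P Q (pvIx P.length y))) (pvBit p))
      refine ⟨true, _, R, _, rfl, hlink.1, by rw [List.length_set]; exact hlen2', hRlen, ?_, ?_⟩
      · intro h
        exact absurd h hreq
      · intro _
        refine ⟨rfl, pvRoot P Q (pvIx P.length x), pvRoot P Q (pvIx P.length y),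
          Or.inl ⟨rfl, rfl⟩, ?_⟩
        intro j hj
        have hl := hlink.2 j (by omega)
        rw [(hpres12 j hj).1, (hpres12 j hj).2] at hl
        try rw [pvBit_b2i]
        exact hl
    · rw [if_neg hk1]
      by_cases hk2 : R.getD (pvRoot P Q (pvIx P.length x)) 0 < R.getD (pvRoot P Q (pvIx P.length y)) 0
      · rw [if_pos hk2]
        rw [pvSet_eq hlen2' hinx, pvSet_eq hQlen2 hinx]
        simp only [pvIx_natCast]
        try dsimp only
        have hlink := pvLink uf2 (rx := pvRoot P Q (pvIx P.length y))
          (ry := pvRoot P Q (pvIx P.length x)) (by omega) (by omega) hrooty2 hrootx2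
          (Ne.symm hreq)
          (xor (xor (pvPar P Q (pvIx P.length x)) (pvPar P Q (pvIx P.length y))) (pvBit p))
        refine ⟨true, _, R, _, rfl, hlink.1, by rw [List.length_set]; exact hlen2', hRlen, ?_, ?_⟩
        · intro h
          exact absurd h hreq
        · intro _
          refine ⟨rfl, pvRoot P Q (pvIx P.length y), pvRoot P Q (pvIx P.length x),
            Or.inr ⟨rfl, rfl⟩, ?_⟩
          intro j hj
          have hl := hlink.2 j (by omega)
          rw [(hpres12 j hj).1, (hpres12 j hj).2] at hl
          try rw [pvBit_b2i]
          exact hl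
      · rw [if_neg hk2]
        rw [pvSet_eq hlen2' hiny, pvSet_eq hQlen2 hiny]
        simp only [pvIx_natCast]
        try dsimp only
        rw [pvSet_eq hRlen hinx]
        simp only [pvIx_natCast]
        try dsimp only
        have hlink := pvLink uf2 (rx := pvRoot P Q (pvIx P.length x))
          (ry := pvRoot P Q (pvIx P.length y)) (by omega) (by omega) hrootx2 hrooty2 hreq
          (xor (xor (pvPar P Q (pvIx P.length x)) (pvPar P Q (pvIx P.length y))) (pvBit p))
        refine ⟨true, _, _, _, rfl, hlink.1, by rw [List.length_set]; exact hlen2',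
          by rw [List.length_set]; exact hRlen, ?_, ?_⟩
        · intro h
          exact absurd h hreq
        · intro _
          refine ⟨rfl, pvRoot P Q (pvIx P.length x), pvRoot P Q (pvIx P.length y),
            Or.inl ⟨rfl, rfl⟩, ?_⟩
          intro j hj
          have hl := hlink.2 j (by omega)
          rw [(hpres12 j hj).1, (hpres12 j hj).2] at hl
          try rw [pvBit_b2i]
          exact hl

-- ---- the simulation relation between A's union-find and B's flat labelling ----
def pvRel (P Q comp par : List Int) : Prop :=
  comp.length = P.length ∧ par.length = P.length ∧
  (∀ i : Nat, i < P.length → par.getD i 0 = 0 ∨ par.getD i 0 = 1) ∧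
  ∀ i j : Nat, i < P.length → j < P.length →
    ((pvRoot P Q i = pvRoot P Q j) ↔ (comp.getD i 0 = comp.getD j 0)) ∧
    (pvRoot P Q i = pvRoot P Q j →
      xor (pvPar P Q i) (pvPar P Q j) = xor (pvBit (par.getD i 0)) (pvBit (par.getD j 0)))

theorem pvBxor_bits {a b : Int} (ha : a = 0 ∨ a = 1) (hb : b = 0 ∨ b = 1) :
    PySem.Int.bxor a b = pvB2I (xor (pvBit a) (pvBit b)) := by
  rw [pv01_b2i ha, pv01_b2i hb, pvB2I_bxor, pvBit_b2i, pvBit_b2i]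

theorem pvXorCancel (a b c : Bool) : xor (xor a c) (xor b c) = xor a b := by
  cases a <;> cases b <;> cases c <;> rfl

theorem pvXorMix {Pi Pj Px Py bi bj bx by' pb : Bool}
    (e1 : xor Pi Py = xor bi by') (e2 : xor Pj Px = xor bj bx) :
    xor (xor Pi (xor (xor Px Py) pb)) Pj =
      xor (xor bi (xor (xor bx by') pb)) bj := by
  cases Pi <;> cases Pj <;> cases Px <;> cases Py <;> cases bi <;> cases bj <;>
    cases bx <;> cases by' <;> cases pb <;> simp_all

theorem pvXorMix' {Pi Pj Px Py bi bj bx by' pb : Bool}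
    (e1 : xor Pj Py = xor bj by') (e2 : xor Pi Px = xor bi bx) :
    xor Pi (xor Pj (xor (xor Px Py) pb)) =
      xor bi (xor bj (xor (xor bx by') pb)) := by
  cases Pi <;> cases Pj <;> cases Px <;> cases Py <;> cases bi <;> cases bj <;>
    cases bx <;> cases by' <;> cases pb <;> simp_all

theorem pvXorMixA {Pi Pj Px Py bi bj bx by' pb : Bool}
    (e1 : xor Pi Px = xor bi bx) (e2 : xor Pj Py = xor bj by') :
    xor (xor Pi (xor (xor Px Py) pb)) Pj =
      xor bi (xor bj (xor (xor bx by') pb)) := by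
  cases Pi <;> cases Pj <;> cases Px <;> cases Py <;> cases bi <;> cases bj <;>
    cases bx <;> cases by' <;> cases pb <;> simp_all

theorem pvXorMixB {Pi Pj Px Py bi bj bx by' pb : Bool}
    (e1 : xor Pi Py = xor bi by') (e2 : xor Pj Px = xor bj bx) :
    xor Pi (xor Pj (xor (xor Px Py) pb)) =
      xor (xor bi (xor (xor bx by') pb)) bj := by
  cases Pi <;> cases Pj <;> cases Px <;> cases Py <;> cases bi <;> cases bj <;>
    cases bx <;> cases by' <;> cases pb <;> simp_all

theorem pvMergeIf {A : Type} [DecidableEq A] {u v a b : A} (huv : u ≠ v) :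
    ((if a = v then u else a) = (if b = v then u else b)) ↔
      (a = b ∨ ((a = u ∨ a = v) ∧ (b = u ∨ b = v))) := by
  split_ifs <;> constructor <;> intro h <;> aesop

theorem pvRel_merge {P Q P' Q' comp par comp' par' : List Int}
    {ix iy u v : Nat} {pb : Bool}
    (hn : P'.length = P.length)
    (hrel : pvRel P Q comp par)
    (hix : ix < P.length) (hiy : iy < P.length)
    (hne : pvRoot P Q ix ≠ pvRoot P Q iy)
    (huv : (u = pvRoot P Q ix ∧ v = pvRoot P Q iy) ∨ (u = pvRoot P Q iy ∧ v = pvRoot P Q ix))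
    (hA : ∀ j : Nat, j < P.length →
      pvRoot P' Q' j = (if pvRoot P Q j = v then u else pvRoot P Q j) ∧
      pvPar P' Q' j = (if pvRoot P Q j = v then
          xor (pvPar P Q j) (xor (xor (pvPar P Q ix) (pvPar P Q iy)) pb) else pvPar P Q j))
    (hcomp' : comp'.length = P.length) (hpar' : par'.length = P.length)
    (hB : ∀ j : Nat, j < P.length →
      comp'.getD j 0 = (if comp.getD j 0 = comp.getD iy 0 then comp.getD ix 0
        else comp.getD j 0) ∧
      par'.getD j 0 = (if comp.getD j 0 = comp.getD iy 0 then
          pvB2I (xor (pvBit (par.getD j 0))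
            (xor (xor (pvBit (par.getD ix 0)) (pvBit (par.getD iy 0))) pb))
        else par.getD j 0)) :
    pvRel P' Q' comp' par' := by
  obtain ⟨hcl, hpl, hbits, hmain⟩ := hrel
  have hcxy : comp.getD ix 0 ≠ comp.getD iy 0 := by
    intro hc
    exact hne ((hmain ix iy hix hiy).1.mpr hc)
  have huvne : u ≠ v := by
    rcases huv with ⟨rfl, rfl⟩ | ⟨rfl, rfl⟩
    · exact hne
    · exact Ne.symm hne
  refine ⟨hcomp'.trans hn.symm, hpar'.trans hn.symm, ?_, ?_⟩
  · intro i hi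
    rw [hn] at hi
    rw [(hB i hi).2]
    split_ifs
    · exact pvB2I_01 _
    · exact hbits i hi
  · intro i j hi hj
    rw [hn] at hi hj
    have hAi := hA i hi
    have hAj := hA j hj
    have hBi := hB i hi
    have hBj := hB j hj
    -- translations between root-membership and label-membership
    have thix : ∀ k : Nat, k < P.length →
        (pvRoot P Q k = pvRoot P Q ix ↔ comp.getD k 0 = comp.getD ix 0) :=
      fun k hk => (hmain k ix hk hix).1
    have thiy : ∀ k : Nat, k < P.length →
        (pvRoot P Q k = pvRoot P Q iy ↔ comp.getD k 0 = comp.getD iy 0) :=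
      fun k hk => (hmain k iy hk hiy).1
    constructor
    · rw [hAi.1, hAj.1, hBi.1, hBj.1, pvMergeIf huvne, pvMergeIf hcxy]
      have hiff := (hmain i j hi hj).1
      rcases huv with ⟨rfl, rfl⟩ | ⟨rfl, rfl⟩ <;>
        rw [thix i hi, thiy i hi, thix j hj, thiy j hj] at * <;> tauto
    · intro hconn
      rw [hAi.1, hAj.1] at hconn
      rw [hAi.2, hAj.2, hBi.2, hBj.2]
      by_cases hij : pvRoot P Q i = pvRoot P Q j
      · have hcij : comp.getD i 0 = comp.getD j 0 := (hmain i j hi hj).1.mp hij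
        have hpq := (hmain i j hi hj).2 hij
        rw [hij, hcij]
        split_ifs <;> (try simp only [pvBit_b2i, pvXorCancel]) <;> exact hpq
      · have hone : (pvRoot P Q i = v ∧ pvRoot P Q j = u) ∨
            (pvRoot P Q i = u ∧ pvRoot P Q j = v) := by
          by_cases h1 : pvRoot P Q i = v <;> by_cases h2 : pvRoot P Q j = v <;>
            simp_all
        have hrelxy := (hmain ix iy hix hiy).1
        -- same-class xor facts, per case
        rcases huv with ⟨hu, hv⟩ | ⟨hu, hv⟩ <;> rcases hone with ⟨h1, h2⟩ | ⟨h1, h2⟩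
        · -- u = Rx, v = Ry; i in y-class (moved in both), j in x-class
          have hiy' : pvRoot P Q i = pvRoot P Q iy := by rw [h1, hv]
          have hjx' : pvRoot P Q j = pvRoot P Q ix := by rw [h2, hu]
          have hci : comp.getD i 0 = comp.getD iy 0 := (thiy i hi).mp hiy'
          have hcj : comp.getD j 0 ≠ comp.getD iy 0 := by
            intro hc
            exact hij (hiy'.trans ((thiy j hj).mpr hc).symm)
          have e1 := (hmain i iy hi hiy).2 hiy'
          have e2 := (hmain j ix hj hix).2 hjx'
          rw [if_pos h1, if_neg (fun hc => huvne (h2.symm.trans hc))]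
          rw [if_pos hci, if_neg hcj, pvBit_b2i]
          exact pvXorMix e1 e2
        · -- u = Rx, v = Ry; j in y-class (moved in both), i in x-class
          have hjy' : pvRoot P Q j = pvRoot P Q iy := by rw [h2, hv]
          have hix' : pvRoot P Q i = pvRoot P Q ix := by rw [h1, hu]
          have hcj : comp.getD j 0 = comp.getD iy 0 := (thiy j hj).mp hjy'
          have hci : comp.getD i 0 ≠ comp.getD iy 0 := by
            intro hc
            exact hij (((thiy i hi).mpr hc).trans hjy'.symm)
          have e1 := (hmain j iy hj hiy).2 hjy'
          have e2 := (hmain i ix hi hix).2 hix'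
          rw [if_neg (fun hc => huvne (h1.symm.trans hc)), if_pos h2]
          rw [if_neg hci, if_pos hcj, pvBit_b2i]
          exact pvXorMix' e1 e2
        · -- u = Ry, v = Rx; i in x-class (moved in A only), j in y-class (moved in B only)
          have hix' : pvRoot P Q i = pvRoot P Q ix := by rw [h1, hv]
          have hjy' : pvRoot P Q j = pvRoot P Q iy := by rw [h2, hu]
          have hcj : comp.getD j 0 = comp.getD iy 0 := (thiy j hj).mp hjy'
          have hci : comp.getD i 0 ≠ comp.getD iy 0 := by
            intro hc
            exact hne (hix'.symm.trans ((thiy i hi).mpr hc))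
          have e1 := (hmain i ix hi hix).2 hix'
          have e2 := (hmain j iy hj hiy).2 hjy'
          rw [if_pos h1, if_neg (fun hc => huvne (h2.symm.trans hc))]
          rw [if_neg hci, if_pos hcj, pvBit_b2i]
          exact pvXorMixA e1 e2
        · -- u = Ry, v = Rx; j in x-class (moved in A only), i in y-class (moved in B only)
          have hjx' : pvRoot P Q j = pvRoot P Q ix := by rw [h2, hv]
          have hiy' : pvRoot P Q i = pvRoot P Q iy := by rw [h1, hu]
          have hci : comp.getD i 0 = comp.getD iy 0 := (thiy i hi).mp hiy'
          have hcj : comp.getD j 0 ≠ comp.getD iy 0 := by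
            intro hc
            exact hne (hjx'.symm.trans ((thiy j hj).mpr hc))
          have e1 := (hmain i iy hi hiy).2 hiy'
          have e2 := (hmain j ix hj hix).2 hjx'
          rw [if_neg (fun hc => huvne (h1.symm.trans hc)), if_pos h2]
          rw [if_pos hci, if_neg hcj, pvBit_b2i]
          exact pvXorMixB e1 e2

-- ---- B's relabelling scan, characterised ----
theorem pvRelabel_fold {comp par : List Int} {m : Nat} (hc : comp.length = m)
    (hp : par.length = m) (cy cx d : Int) :
    ∀ k : Nat, k ≤ m →
      (pvRelabel (k : Int) comp par cy cx d).1.length = m ∧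
      (pvRelabel (k : Int) comp par cy cx d).2.length = m ∧
      (∀ j : Nat, j < k →
        (pvRelabel (k : Int) comp par cy cx d).1.getD j 0 =
          (if comp.getD j 0 = cy then cx else comp.getD j 0) ∧
        (pvRelabel (k : Int) comp par cy cx d).2.getD j 0 =
          (if comp.getD j 0 = cy then PySem.Int.bxor (par.getD j 0) d else par.getD j 0)) ∧
      (∀ j : Nat, k ≤ j →
        (pvRelabel (k : Int) comp par cy cx d).1.getD j 0 = comp.getD j 0 ∧
        (pvRelabel (k : Int) comp par cy cx d).2.getD j 0 = par.getD j 0) := by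
  intro k
  induction k with
  | zero =>
    intro _
    have h0 : PySem.List.pyRange 0 ((0 : Nat) : Int) 1 = [] := by
      rw [Nat.cast_zero]
      exact PySem.List.pyRange_one_eq_nil (le_refl 0)
    rw [pvRelabel, h0]
    exact ⟨hc, hp, fun j hj => absurd hj (by omega), fun j _ => ⟨rfl, rfl⟩⟩
  | succ k ih =>
    intro hk1
    obtain ⟨hl1, hl2, hupd, hold⟩ := ih (by omega)
    have hsplit : PySem.List.pyRange 0 ((k + 1 : Nat) : Int) 1 =
        PySem.List.pyRange 0 (k : Int) 1 ++ [(k : Int)] := by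
      push_cast
      exact PySem.List.pyRange_one_succ_right (by omega)
    rw [pvRelabel, hsplit, List.foldl_append]
    rw [show (PySem.List.pyRange 0 (k : Int) 1).foldl _ (comp, par) =
      pvRelabel (k : Int) comp par cy cx d from rfl]
    set G := pvRelabel (k : Int) comp par cy cx d with hG
    have hGk1 : G.1.getD k 0 = comp.getD k 0 := (hold k (le_refl k)).1
    have hGk2 : G.2.getD k 0 = par.getD k 0 := (hold k (le_refl k)).2
    simp only [List.foldl_cons, List.foldl_nil, PySem.List.pyGetD_natCast,
      PySem.List.pySetD_natCast]
    by_cases hcyk : comp.getD k 0 = cy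
    · rw [if_pos (show G.1.getD k 0 = cy by rw [hGk1]; exact hcyk)]
      refine ⟨by simp [hl1], by simp [hl2], ?_, ?_⟩
      · intro j hj
        by_cases hjk : j = k
        · subst hjk
          constructor
          · rw [pvGetD_set, if_pos ⟨rfl, by omega⟩, if_pos hcyk]
          · rw [pvGetD_set, if_pos ⟨rfl, by omega⟩, if_pos hcyk, hGk2]
        · constructor
          · rw [pvGetD_set, if_neg (fun hcc => hjk hcc.1)]
            exact (hupd j (by omega)).1
          · rw [pvGetD_set, if_neg (fun hcc => hjk hcc.1)]
            exact (hupd j (by omega)).2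
      · intro j hj
        constructor
        · rw [pvGetD_set, if_neg (fun hcc => by omega)]
          exact (hold j (by omega)).1
        · rw [pvGetD_set, if_neg (fun hcc => by omega)]
          exact (hold j (by omega)).2
    · rw [if_neg (show ¬ G.1.getD k 0 = cy by rw [hGk1]; exact hcyk)]
      refine ⟨hl1, hl2, ?_, ?_⟩
      · intro j hj
        by_cases hjk : j = k
        · subst hjk
          rw [if_neg hcyk, if_neg hcyk]
          exact hold j (le_refl j)
        · exact hupd j (by omega)
      · intro j hj
        exact hold j (by omega)

theorem pvRel_pres {P Q P' Q' comp par : List Int}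
    (hn : P'.length = P.length)
    (hpres : ∀ j : Nat, j < P.length → pvRoot P' Q' j = pvRoot P Q j ∧ pvPar P' Q' j = pvPar P Q j)
    (hrel : pvRel P Q comp par) : pvRel P' Q' comp par := by
  obtain ⟨h1, h2, h3, h4⟩ := hrel
  refine ⟨h1.trans hn.symm, h2.trans hn.symm, fun i hi => h3 i (by omega), ?_⟩
  intro i j hi hj
  rw [hn] at hi hj
  rw [(hpres i hi).1, (hpres j hj).1, (hpres i hi).2, (hpres j hj).2]
  exact h4 i j hi hj

-- ---- the two main loops simulate each other ----
theorem pvLoop_spec {m : Nat} :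
    ∀ (cs : List (Int × Int × Int)) (P R Q comp par : List Int),
    pvUF P Q → P.length = m → R.length = m → pvRel P Q comp par →
    (∀ c ∈ cs, PySem.Raise.InRange m c.1 ∧ PySem.Raise.InRange m c.2.1) →
    (∃ P' R' Q' comp' par',
       pvLoopA cs P R Q = some (false, P', R', Q') ∧
       pvLoopB cs (m : Int) comp par = some (false, comp', par')) ∨
    (∃ P' R' Q' comp' par',
       pvLoopA cs P R Q = some (true, P', R', Q') ∧
       pvLoopB cs (m : Int) comp par = some (true, comp', par') ∧
       pvUF P' Q' ∧ P'.length = m ∧ pvRel P' Q' comp' par') := by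
  intro cs
  induction cs with
  | nil =>
    intro P R Q comp par uf hPm hRm hrel _
    exact Or.inr ⟨P, R, Q, comp, par, rfl, rfl, uf, hPm, hrel⟩
  | cons c rest ih =>
    obtain ⟨x, y, rp⟩ := c
    intro P R Q comp par uf hPm hRm hrel hcs
    obtain ⟨hxr, hyr⟩ := hcs (x, y, rp) (by simp)
    have hrest : ∀ c ∈ rest, PySem.Raise.InRange m c.1 ∧ PySem.Raise.InRange m c.2.1 :=
      fun c hc => hcs c (by simp [hc])
    have hx : PySem.Raise.InRange P.length x := by rw [hPm]; exact hxr
    have hy : PySem.Raise.InRange P.length y := by rw [hPm]; exact hyr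
    have hp := pvModTwo rp
    obtain ⟨hcl, hpl, hbits, hmain⟩ := hrel
    have hixlt : pvIx P.length x < P.length := pvIx_lt hx
    have hiylt : pvIx P.length y < P.length := pvIx_lt hy
    obtain ⟨ok, P', R', Q', hun, uf', hP'm, hR'm, hsame, hdiff⟩ :=
      pvUnion_spec uf (hRm.trans hPm.symm) hx hy hp
    -- B side reads
    have hgc1 : PySem.List.pyGet? comp x = some (comp.getD (pvIx P.length x) 0) := by
      have := pvGet_eq' (0 : Int) (hcl.trans hPm) (show PySem.Raise.InRange m x from hxr)
      rw [this]
      congr 1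
      rw [show pvIx m x = pvIx P.length x by rw [hPm]]
    have hgc2 : PySem.List.pyGet? comp y = some (comp.getD (pvIx P.length y) 0) := by
      have := pvGet_eq' (0 : Int) (hcl.trans hPm) (show PySem.Raise.InRange m y from hyr)
      rw [this]
      congr 1
      rw [show pvIx m y = pvIx P.length y by rw [hPm]]
    have hgp1 : PySem.List.pyGet? par x = some (par.getD (pvIx P.length x) 0) := by
      have := pvGet_eq' (0 : Int) (hpl.trans hPm) (show PySem.Raise.InRange m x from hxr)
      rw [this]
      congr 1
      rw [show pvIx m x = pvIx P.length x by rw [hPm]]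
    have hgp2 : PySem.List.pyGet? par y = some (par.getD (pvIx P.length y) 0) := by
      have := pvGet_eq' (0 : Int) (hpl.trans hPm) (show PySem.Raise.InRange m y from hyr)
      rw [this]
      congr 1
      rw [show pvIx m y = pvIx P.length y by rw [hPm]]
    rw [pvLoopA, pvLoopB, hun, hgc1, hgc2, hgp1, hgp2]
    dsimp only
    have hbx := hbits _ hixlt
    have hby := hbits _ hiylt
    have hbxoreq : PySem.Int.bxor (par.getD (pvIx P.length x) 0) (par.getD (pvIx P.length y) 0) =
        pvB2I (xor (pvBit (par.getD (pvIx P.length x) 0)) (pvBit (par.getD (pvIx P.length y) 0))) :=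
      pvBxor_bits hbx hby
    by_cases hreq : pvRoot P Q (pvIx P.length x) = pvRoot P Q (pvIx P.length y)
    · -- same class on both sides
      have hceq : comp.getD (pvIx P.length x) 0 = comp.getD (pvIx P.length y) 0 :=
        (hmain _ _ hixlt hiylt).1.mp hreq
      have hxyeq := (hmain _ _ hixlt hiylt).2 hreq
      obtain ⟨hok, hpres⟩ := hsame hreq
      rw [if_pos hceq]
      by_cases hconf : xor (pvPar P Q (pvIx P.length x)) (pvPar P Q (pvIx P.length y)) = pvBit (PySem.Int.mod rp 2)
      · -- no conflict on either side
        have hokT : ok = true := by rw [hok]; exact beq_iff_eq.mpr hconf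
        have hbconf : ¬ PySem.Int.bxor (par.getD (pvIx P.length x) 0)
            (par.getD (pvIx P.length y) 0) ≠ PySem.Int.mod rp 2 := by
          intro hcc
          exact hcc (by rw [hbxoreq, ← hxyeq, hconf, ← pv01_b2i hp])
        rw [if_neg hbconf, hokT]
        exact ih P' R' Q' comp par uf' (by omega) (by omega)
          (pvRel_pres (by omega) hpres ⟨hcl, hpl, hbits, hmain⟩) hrest
      · -- conflict on either side
        have hokF : ok = false := by rw [hok]; exact beq_eq_false_iff_ne.mpr hconf
        have hbconf : PySem.Int.bxor (par.getD (pvIx P.length x) 0)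
            (par.getD (pvIx P.length y) 0) ≠ PySem.Int.mod rp 2 := by
          intro hcc
          apply hconf
          rw [hbxoreq, pv01_b2i hp] at hcc
          exact hxyeq.trans (pvB2I_inj hcc)
        rw [if_pos hbconf, hokF]
        exact Or.inl ⟨P', R', Q', comp, par, rfl, rfl⟩
    · -- different classes on both sides: merge
      have hcne : comp.getD (pvIx P.length x) 0 ≠ comp.getD (pvIx P.length y) 0 := by
        intro hc
        exact hreq ((hmain _ _ hixlt hiylt).1.mpr hc)
      obtain ⟨hokT, u, v, huv, hAeff⟩ := hdiff hreq
      rw [if_neg hcne, hokT]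
      -- B's relabel state
      have hrelab := pvRelabel_fold (hcl.trans hPm) (hpl.trans hPm)
        (comp.getD (pvIx P.length y) 0) (comp.getD (pvIx P.length x) 0)
        (PySem.Int.bxor (PySem.Int.bxor (par.getD (pvIx P.length x) 0)
          (par.getD (pvIx P.length y) 0)) (PySem.Int.mod rp 2)) m (le_refl m)
      obtain ⟨hs1, hs2, hsupd, _⟩ := hrelab
      have hrel' : pvRel P' Q' (pvRelabel (m : Int) comp par (comp.getD (pvIx P.length y) 0)
          (comp.getD (pvIx P.length x) 0)
          (PySem.Int.bxor (PySem.Int.bxor (par.getD (pvIx P.length x) 0)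
            (par.getD (pvIx P.length y) 0)) (PySem.Int.mod rp 2))).1
          (pvRelabel (m : Int) comp par (comp.getD (pvIx P.length y) 0)
          (comp.getD (pvIx P.length x) 0)
          (PySem.Int.bxor (PySem.Int.bxor (par.getD (pvIx P.length x) 0)
            (par.getD (pvIx P.length y) 0)) (PySem.Int.mod rp 2))).2 := by
        refine pvRel_merge (pb := pvBit (PySem.Int.mod rp 2)) (ix := pvIx P.length x)
          (iy := pvIx P.length y) (u := u) (v := v) (by omega) ⟨hcl, hpl, hbits, hmain⟩
          hixlt hiylt hreq huv hAeff (hs1.trans hPm.symm) (hs2.trans hPm.symm) ?_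
        intro j hj
        obtain ⟨he1, he2⟩ := hsupd j (by omega)
        refine ⟨he1, ?_⟩
        rw [he2]
        have hval : ∀ a : Int, (a = 0 ∨ a = 1) →
            PySem.Int.bxor a (PySem.Int.bxor (PySem.Int.bxor (par.getD (pvIx P.length x) 0)
              (par.getD (pvIx P.length y) 0)) (PySem.Int.mod rp 2)) =
            pvB2I (xor (pvBit a) (xor (xor (pvBit (par.getD (pvIx P.length x) 0))
              (pvBit (par.getD (pvIx P.length y) 0))) (pvBit (PySem.Int.mod rp 2)))) := by
          intro a ha
          rw [pvBxor_bits hbx hby, pvBxor_bits (pvB2I_01 _) hp, pvBit_b2i,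
            pvBxor_bits ha (pvB2I_01 _), pvBit_b2i]
        by_cases hcj : comp.getD j 0 = comp.getD (pvIx P.length y) 0
        · rw [if_pos hcj, if_pos hcj, hval _ (hbits j (by omega))]
        · rw [if_neg hcj, if_neg hcj]
      exact ih P' R' Q' _ _ uf' (by omega) (by omega) hrel' hrest

-- ---- A's final counting pass ----
theorem pvCountA_spec :
    ∀ (is : List Int) (P Q : List Int), pvUF P Q →
    (∀ i ∈ is, PySem.Raise.InRange P.length i) →
    ∀ s : PySem.Set (Int × Int), pvCountA is P Q s =
      some (is.foldl (fun s i => PySem.Set.add s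
        (((pvRoot P Q (pvIx P.length i) : Nat) : Int),
         pvB2I (pvPar P Q (pvIx P.length i)))) s) := by
  intro is
  induction is with
  | nil => intro P Q _ _ s; rfl
  | cons i rest ih =>
    intro P Q uf hin s
    have hi : PySem.Raise.InRange P.length i := hin i (by simp)
    have hixlt := pvIx_lt hi
    obtain ⟨P1, Q1, hfind, uf1, hlen1, hpres1, _, _, hQix1⟩ :=
      pvFind_spec uf hi (P.length + 1) (by have := pvDist_lt_len uf hixlt; omega)
    rw [pvCountA, hfind]
    dsimp only
    rw [pvGet_eq' (0 : Int) (uf1.hlen.trans hlen1) hi, hQix1]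
    dsimp only
    rw [List.foldl_cons]
    have hrest : ∀ j ∈ rest, PySem.Raise.InRange P1.length j := by
      intro j hj
      rw [hlen1]
      exact hin j (by simp [hj])
    rw [ih P1 Q1 uf1 hrest]
    congr 1
    apply PySem.List.foldl_congr_mem
    intro acc j hj
    have hjr : PySem.Raise.InRange P.length j := hin j (by simp [hj])
    have hjx : pvIx P1.length j = pvIx P.length j := by rw [hlen1]
    rw [hjx, (hpres1 _ (pvIx_lt hjr)).1, (hpres1 _ (pvIx_lt hjr)).2]

-- ---- equal numbers of distinct labels ----
theorem pvCard_eq (F G : Nat → Int × Int) :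
    ∀ n : Nat, (∀ k l : Nat, k < n → l < n → (F k = F l ↔ G k = G l)) →
      (PySem.Set.ofList ((List.range n).map F)).length =
      (PySem.Set.ofList ((List.range n).map G)).length := by
  intro n
  induction n with
  | zero => intro _; rfl
  | succ n ih =>
    intro h
    rw [List.range_succ, List.map_append, List.map_append]
    simp only [List.map_cons, List.map_nil]
    rw [PySem.Set.ofList_append_singleton, PySem.Set.ofList_append_singleton]
    have hmemiff : F n ∈ PySem.Set.ofList ((List.range n).map F) ↔
        G n ∈ PySem.Set.ofList ((List.range n).map G) := by
      rw [PySem.Set.mem_ofList, PySem.Set.mem_ofList]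
      simp only [List.mem_map, List.mem_range]
      constructor
      · rintro ⟨k, hk, he⟩
        exact ⟨k, hk, (h k n (by omega) (by omega)).mp he⟩
      · rintro ⟨k, hk, he⟩
        exact ⟨k, hk, (h k n (by omega) (by omega)).mpr he⟩
    have ihn := ih (fun k l hk hl => h k l (by omega) (by omega))
    by_cases hmem : F n ∈ PySem.Set.ofList ((List.range n).map F)
    · rw [PySem.Set.add_of_mem hmem, PySem.Set.add_of_mem (hmemiff.mp hmem)]
      exact ihn
    · rw [PySem.Set.add_of_not_mem hmem,
        PySem.Set.add_of_not_mem (fun hc => hmem (hmemiff.mpr hc))]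
      rw [List.length_append, List.length_append, ihn]
      simp

-- ---- initial state, and the assembled equivalence ----
theorem pvXorFalse {a b : Bool} : xor a b = false ↔ a = b := by
  cases a <;> cases b <;> simp

theorem pvRepl_getD (m : Nat) (j : Nat) : (List.replicate m (0 : Int)).getD j 0 = 0 := by
  by_cases hj : j < m
  · rw [List.getD, List.getElem?_eq_getElem (by simpa using hj)]
    simp
  · rw [List.getD, List.getElem?_eq_none_iff.mpr (by simpa using hj)]
    rfl

theorem pvInit {m : Nat} (hm : 0 < m) :
    (PySem.List.pyRange 0 (m : Int) 1).length = m ∧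
    (∀ j : Nat, j < m → (PySem.List.pyRange 0 (m : Int) 1).getD j 0 = (j : Int)) ∧
    pvUF (PySem.List.pyRange 0 (m : Int) 1) (List.replicate m (0 : Int)) ∧
    pvRel (PySem.List.pyRange 0 (m : Int) 1) (List.replicate m (0 : Int))
      (PySem.List.pyRange 0 (m : Int) 1) (List.replicate m (0 : Int)) := by
  have hlen0 : (PySem.List.pyRange 0 (m : Int) 1).length = m := by
    rw [PySem.List.length_pyRange_one]
    omega
  have hget0 : ∀ j : Nat, j < m → (PySem.List.pyRange 0 (m : Int) 1).getD j 0 = (j : Int) := by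
    intro j hj
    rw [List.getD, List.getElem?_eq_getElem (by omega)]
    rw [PySem.List.getElem_pyRange_one]
    simp
  have uf0 : pvUF (PySem.List.pyRange 0 (m : Int) 1) (List.replicate m (0 : Int)) := by
    refine ⟨by simp [hlen0], ?_, ?_, ?_, ?_⟩
    · intro j hj
      rw [hlen0] at hj ⊢
      rw [hget0 j hj]
      omega
    · intro j hj
      rw [hlen0] at hj
      obtain ⟨f, hf⟩ : ∃ f, (PySem.List.pyRange 0 (m : Int) 1).length = f + 1 :=
        ⟨m - 1, by omega⟩
      rw [hf, pvChase_root (hget0 j hj)]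
      rfl
    · intro j _ _
      exact pvRepl_getD m j
    · intro j _
      exact Or.inl (pvRepl_getD m j)
  have hRoot0 : ∀ j : Nat, j < m →
      pvRoot (PySem.List.pyRange 0 (m : Int) 1) (List.replicate m (0 : Int)) j = j ∧
      pvPar (PySem.List.pyRange 0 (m : Int) 1) (List.replicate m (0 : Int)) j = false :=
    fun j hj => ⟨(pvRoot_of_root (by omega) (hget0 j hj)).1,
      (pvRoot_of_root (by omega) (hget0 j hj)).2.1⟩
  refine ⟨hlen0, hget0, uf0, rfl, by simp [hlen0], ?_, ?_⟩
  · intro i hi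
    exact Or.inl (pvRepl_getD m i)
  · intro i j hi hj
    rw [hlen0] at hi hj
    rw [(hRoot0 i hi).1, (hRoot0 j hj).1, (hRoot0 i hi).2, (hRoot0 j hj).2]
    constructor
    · rw [hget0 i hi, hget0 j hj]
      simp
    · intro _
      rw [pvRepl_getD, pvRepl_getD]
      rfl

theorem pv_main (N M : Int) (conditions : List (Int × Int × Int))
    (hpre : Pre_minimum_cost_to_determine_cards N M conditions) :
    minimum_cost_to_determine_cards N M conditions =
      minimum_cost_to_determine_cards_alt N M conditions := by
  unfold minimum_cost_to_determine_cards minimum_cost_to_determine_cards_alt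
  by_cases h1 : N ≤ 0 ∨ M < 0
  · rw [if_pos h1, if_pos h1]
  rw [if_neg h1, if_neg h1]
  by_cases h2 : M = 0
  · rw [if_pos h2, if_pos h2]
  rw [if_neg h2, if_neg h2]
  by_cases h3 : PySem.List.len conditions > M
  · rw [if_pos h3, if_pos h3]
  rw [if_neg h3, if_neg h3]
  have hN : 0 < N := by omega
  have hin : ∀ c ∈ conditions, (-N ≤ c.1 ∧ c.1 < N) ∧ (-N ≤ c.2.1 ∧ c.2.1 < N) := by
    rcases hpre with h | h | h | h
    · exact absurd h h1
    · exact absurd h h2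
    · exact absurd (by rw [PySem.List.len_eq]; exact h) h3
    · exact h
  have hmN : ((N.toNat : Nat) : Int) = N := by omega
  rw [← hmN]
  simp only [Int.toNat_natCast]
  have hm : 0 < N.toNat := by omega
  obtain ⟨hlen0, hget0, uf0, rel0⟩ := pvInit hm
  have hranges : ∀ c ∈ conditions,
      PySem.Raise.InRange N.toNat c.1 ∧ PySem.Raise.InRange N.toNat c.2.1 := by
    intro c hc
    obtain ⟨⟨ha, hb⟩, hc', hd⟩ := hin c hc
    exact ⟨⟨by omega, by omega⟩, ⟨by omega, by omega⟩⟩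
  rcases pvLoop_spec (m := N.toNat) conditions _ (List.replicate N.toNat (0 : Int)) _ _ _
      uf0 hlen0 (by simp) rel0 hranges with
    ⟨P', R', Q', comp', par', hA, hB⟩ |
    ⟨P', R', Q', comp', par', hA, hB, uf', hP'm, rel'⟩
  · rw [hA, hB]
  · rw [hA, hB]
    dsimp only
    have hcnt := pvCountA_spec (PySem.List.pyRange 0 (N.toNat : Int) 1) P' Q' uf'
      (by
        intro i hi
        rw [PySem.List.mem_pyRange_one] at hi
        rw [hP'm]
        exact ⟨by omega, by omega⟩)
      PySem.Set.empty
    rw [hcnt]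
    obtain ⟨hcl', hpl', hbits', hmain'⟩ := rel'
    -- both counts as deduplicated maps over range
    rw [← PySem.Set.update_map_eq_foldl_add, PySem.Set.update_empty]
    rw [PySem.List.pyRange_zero_nat, List.map_map, List.map_map]
    have hFG := pvCard_eq
      (fun k => (((pvRoot P' Q' (pvIx P'.length ((k : Nat) : Int)) : Nat) : Int),
        pvB2I (pvPar P' Q' (pvIx P'.length ((k : Nat) : Int)))))
      (fun k => (PySem.List.pyGetD comp' ((k : Nat) : Int) 0,
        PySem.List.pyGetD par' ((k : Nat) : Int) 0))
      N.toNat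
      (by
        intro k l hk hl
        simp only [PySem.List.pyGetD_natCast, pvIx_natCast, hP'm]
        rw [Prod.mk.injEq, Prod.mk.injEq]
        have hK := hmain' k l (by omega) (by omega)
        constructor
        · rintro ⟨hr, hq⟩
          have hr' : pvRoot P' Q' k = pvRoot P' Q' l := by exact_mod_cast hr
          have hq' := pvB2I_inj hq
          refine ⟨hK.1.mp hr', ?_⟩
          have hxor := hK.2 hr'
          rw [hq', Bool.xor_self] at hxor
          have hbkl := pvXorFalse.mp hxor.symm
          rw [pv01_b2i (hbits' k (by omega)), pv01_b2i (hbits' l (by omega)), hbkl]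
        · rintro ⟨hc, hq⟩
          have hr' := hK.1.mpr hc
          refine ⟨by exact_mod_cast hr', ?_⟩
          have hxor := hK.2 hr'
          have hbkl : pvBit (par'.getD k 0) = pvBit (par'.getD l 0) := by rw [hq]
          rw [hbkl, Bool.xor_self] at hxor
          rw [pvXorFalse.mp hxor])
    show (PySem.Set.ofList _).len = (PySem.Set.ofList _).len
    unfold PySem.Set.len
    congr 1

-- ===== VERDICT (by name: the statement is the Claim_ definition above) =====
theorem minimum_cost_to_determine_cards_spec : Claim_equal_minimum_cost_to_determine_cards := by
  intro N M conditions _ hpre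
  unfold Spec_minimum_cost_to_determine_cards
  exact pv_main N M conditions hpre
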